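-- pv_equiv track=rewrite | github.com/ikokkari/PythonProblems | labs109.py | shapley_shubik
-- ===== SOURCE A (Python) =====
-- __factorials = [1]
--
-- def __fact(n):
--     while len(__factorials) < n + 1:
--         __factorials.append(len(__factorials) * __factorials[-1])
--     return __factorials[n]
--
-- def shapley_shubik(weight, quota):
--     n = len(weight)
--     left = [i - 1 if i > 0 else n for i in range(n + 1)]
--     right = [i + 1 if i < n else 0 for i in range(n + 1)]
--     power = [0 for _ in range(n)]
--
--     def rec(remain, m, prev):
--         if remain <= 0:
--             power[prev] += __fact(m)
--         else:
--             i = right[n]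
--             while i != n:
--                 right[left[i]] = right[i] # Joe, meet Moe
--                 left[right[i]] = left[i]  # Moe, meet Joe
--                 rec(remain - weight[i], m - 1, i)
--                 left[right[i]] = right[left[i]] = i  # Sorry for butting back in
--                 i = right[i]
--
--     rec(quota, n, -1)
--     return power
-- ===== SOURCE B (Python) =====
-- # Bottom-up bitmask DP over coalitions instead of a depth-first search over
-- # all orderings: count the below-quota orderings of every coalition, then
-- # combine each coalition with factorials of the players not yet placed.
-- def shapley_shubik(weight, quota):
--     n = len(weight)
--     fact = [1] * (n + 1)
--     for k in range(1, n + 1):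
--         fact[k] = fact[k - 1] * k
--     size = 1 << n
--     total = [0] * size   # total[mask] = summed weight of the players in mask
--     pc = [0] * size      # pc[mask] = number of players in mask
--     for i in range(n):
--         bit = 1 << i
--         for mask in range(bit, bit << 1):
--             total[mask] = total[mask ^ bit] + weight[i]
--             pc[mask] = pc[mask ^ bit] + 1
--     # orders[mask] = number of orderings of the players in mask in which every
--     # proper prefix, the empty one included, keeps the running total below the
--     # quota (so nothing is counted when the quota is already met at the start)
--     orders = [0] * size
--     if 0 < quota:
--         orders[0] = 1
--     for mask in range(1, size):
--         if total[mask] < quota: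
--             acc = 0
--             for j in range(n):
--                 if mask & (1 << j):
--                     acc += orders[mask ^ (1 << j)]
--             orders[mask] = acc
--     # player i is pivotal right after a below-quota coalition it completes
--     power = [0] * n
--     for i in range(n):
--         bit = 1 << i
--         for mask in range(size):
--             if mask & bit == 0:
--                 c = orders[mask]
--                 if c and total[mask] + weight[i] >= quota:
--                     power[i] += c * fact[n - 1 - pc[mask]]
--     return power
-- ===== Notes on version B (the rewrite author's own statement) =====
-- stated objective: faster
-- what changed: Replaces A's depth-first search over all pivotal orderings (dancing-links circular list, near O(n*n!)) with a bottom-up bitmask DP that counts, per coalition, the orderings staying below quota and combines each coalition with factorials of the unplaced players (intended as asymptotically faster; measured: A timed out at n=16 where B returned, no clean ratio at sizes both finish); …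
-- outside the precondition, e.g. on shapley_shubik([1, 1], 0): A returns [0, 2], B returns [0, 0]; on shapley_shubik([], 0): A raises IndexError, B returns []
import Mathlib
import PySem

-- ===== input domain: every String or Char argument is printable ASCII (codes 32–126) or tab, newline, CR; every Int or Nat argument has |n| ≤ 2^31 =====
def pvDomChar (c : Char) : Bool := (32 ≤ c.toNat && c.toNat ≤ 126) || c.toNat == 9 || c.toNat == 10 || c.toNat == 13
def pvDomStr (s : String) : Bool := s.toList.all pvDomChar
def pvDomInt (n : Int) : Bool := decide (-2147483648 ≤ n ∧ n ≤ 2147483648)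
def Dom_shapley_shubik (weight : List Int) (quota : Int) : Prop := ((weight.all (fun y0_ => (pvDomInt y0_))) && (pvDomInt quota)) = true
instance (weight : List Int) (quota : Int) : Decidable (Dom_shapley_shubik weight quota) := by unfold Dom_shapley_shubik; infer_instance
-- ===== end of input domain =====

-- B replaces A's depth-first search over all pivotal orderings (dancing-links circular
-- list) with a bottom-up bitmask DP over coalitions; equal return values on Pre_
-- (positive quota, the natural domain of a weighted-voting game).

-- ===== PORT A =====

-- __fact's memo-filling while loop (__factorials[-1] is the last entry; the list is never empty)
def pvFactFill (facts : List Int) (n : Int) : List Int :=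
  if (facts.length : Int) < n + 1 then
    pvFactFill (facts ++ [(facts.length : Int) * PySem.List.pyGetD facts (-1) 0]) n
  else facts
termination_by (n + 1 - (facts.length : Int)).toNat
decreasing_by simp only [List.length_append, List.length_cons, List.length_nil]; omega

-- __fact(n) = __factorials[n] after filling (A only calls it with 0 ≤ n, where this is exact)
def pvFact (n : Int) : Int := PySem.List.pyGetD (pvFactFill [1] n) n 0

-- rec / its inner while loop; the Python mutates left/right/power in place, so the port
-- threads the three lists through and returns them; fuel bounds the recursion depth
-- (≤ n+1 nested calls: each removes one player) and wfuel the while loop (≤ n+1 steps).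
set_option maxHeartbeats 1000000 in
mutual
def pvRec (w : List Int) (nn : Nat) (remain m prev : Int)
    (ln rn power : List Int) (fuel : Nat) : List Int × List Int × List Int :=
  match fuel with
  | 0 => (ln, rn, power)
  | fuel + 1 =>
    if remain ≤ 0 then
      (ln, rn, PySem.List.pySetD power prev (PySem.List.pyGetD power prev 0 + pvFact m))
    else
      pvWalk w nn remain m (PySem.List.pyGetD rn (nn : Int) 0) ln rn power fuel (nn + 1)
termination_by (fuel, 0)

def pvWalk (w : List Int) (nn : Nat) (remain m : Int) (i : Int)
    (ln rn power : List Int) (fuel wfuel : Nat) : List Int × List Int × List Int :=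
  match wfuel with
  | 0 => (ln, rn, power)
  | wfuel + 1 =>
    if i = (nn : Int) then (ln, rn, power)
    else
      -- right[left[i]] = right[i]; left[right[i]] = left[i]
      let rn1 := PySem.List.pySetD rn (PySem.List.pyGetD ln i 0) (PySem.List.pyGetD rn i 0)
      let ln1 := PySem.List.pySetD ln (PySem.List.pyGetD rn1 i 0) (PySem.List.pyGetD ln i 0)
      match pvRec w nn (remain - PySem.List.pyGetD w i 0) (m - 1) i ln1 rn1 power fuel with
      | (ln2, rn2, power2) =>
        -- left[right[i]] = right[left[i]] = i  (chained: left[right[i]] = i, then right[left[i]] = i)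
        let ln3 := PySem.List.pySetD ln2 (PySem.List.pyGetD rn2 i 0) i
        let rn3 := PySem.List.pySetD rn2 (PySem.List.pyGetD ln3 i 0) i
        pvWalk w nn remain m (PySem.List.pyGetD rn3 i 0) ln3 rn3 power2 fuel wfuel
termination_by (fuel, wfuel)
end

def shapley_shubik (weight : List Int) (quota : Int) : List Int :=
  let n := weight.length
  let ln := (PySem.List.pyRange 0 ((n : Int) + 1) 1).map (fun i => if i > 0 then i - 1 else (n : Int))
  let rn := (PySem.List.pyRange 0 ((n : Int) + 1) 1).map (fun i => if i < (n : Int) then i + 1 else 0)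
  let power := (PySem.List.pyRange 0 (n : Int) 1).map (fun _ => (0 : Int))
  (pvRec weight n quota (n : Int) (-1) ln rn power (n + 1)).2.2

-- ===== PORT B =====

-- dense integer tables (Python lists indexed by nonnegative masks) as arrays
def pvAget (a : Array Int) (i : Nat) : Int := a.getD i 0
def pvAset (a : Array Int) (i : Nat) (v : Int) : Array Int := a.setIfInBounds i v

-- fact = [1]*(n+1); fact[k] = fact[k-1]*k for k in range(1, n+1)
def pvFactTab (n : Nat) : List Int :=
  (List.range' 1 n).foldl (fun f k => f.set k (f.getD (k - 1) 0 * (k : Int)))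
    (List.replicate (n + 1) (1 : Int))

-- one cell of the total/pc fill: total[mask] = total[mask^bit]+weight[i]; same for pc
def pvTabCell (w : List Int) (i : Nat) (st : Array Int × Array Int) (mask : Nat) :
    Array Int × Array Int :=
  (pvAset st.1 mask (pvAget st.1 (mask ^^^ (1 <<< i)) + w.getD i 0),
   pvAset st.2 mask (pvAget st.2 (mask ^^^ (1 <<< i)) + 1))

-- for mask in range(bit, bit << 1): ...
def pvTabStep (w : List Int) (st : Array Int × Array Int) (i : Nat) : Array Int × Array Int :=
  (List.range' (1 <<< i) (1 <<< i)).foldl (pvTabCell w i) st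

-- for i in range(n): ...
def pvTables (w : List Int) (n : Nat) : Array Int × Array Int :=
  (List.range n).foldl (pvTabStep w) (Array.replicate (1 <<< n) 0, Array.replicate (1 <<< n) 0)

-- acc over the set bits of mask: for j in range(n): if mask & (1 << j): acc += orders[mask ^ (1 << j)]
def pvAcc (od : Array Int) (n mask : Nat) : Int :=
  (List.range n).foldl (fun acc j =>
    if mask &&& (1 <<< j) ≠ 0 then acc + pvAget od (mask ^^^ (1 <<< j)) else acc) 0

-- for mask in range(1, size): if total[mask] < quota: orders[mask] = acc
def pvOrdStep (quota : Int) (n : Nat) (total : Array Int) (od : Array Int) (mask : Nat) :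
    Array Int :=
  if pvAget total mask < quota then pvAset od mask (pvAcc od n mask) else od

-- orders = [0]*size; if 0 < quota: orders[0] = 1; then the fill loop
def pvOrders (quota : Int) (n : Nat) (total : Array Int) : Array Int :=
  (List.range' 1 (1 <<< n - 1)).foldl (pvOrdStep quota n total)
    (pvAset (Array.replicate (1 <<< n) 0) 0 (if 0 < quota then 1 else 0))

-- the pivot accumulation: for mask in range(size): if mask & bit == 0: ...
def pvFinCell (w : List Int) (quota : Int) (n : Nat) (fact : List Int)
    (tp : Array Int × Array Int) (orders : Array Int) (i : Nat) (pw : List Int) (mask : Nat) :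
    List Int :=
  if mask &&& (1 <<< i) = 0 then
    if pvAget orders mask ≠ 0 ∧ pvAget tp.1 mask + w.getD i 0 ≥ quota then
      pw.set i (pw.getD i 0 +
        pvAget orders mask * PySem.List.pyGetD fact ((n : Int) - 1 - pvAget tp.2 mask) 0)
    else pw
  else pw

def pvFinStep (w : List Int) (quota : Int) (n : Nat) (fact : List Int)
    (tp : Array Int × Array Int) (orders : Array Int) (pw : List Int) (i : Nat) : List Int :=
  (List.range (1 <<< n)).foldl (pvFinCell w quota n fact tp orders i) pw

def shapley_shubik_alt (weight : List Int) (quota : Int) : List Int :=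
  let n := weight.length
  let fact := pvFactTab n
  let tp := pvTables weight n
  let orders := pvOrders quota n tp.1
  (List.range n).foldl (pvFinStep weight quota n fact tp orders) (List.replicate n (0 : Int))

-- ===== PRECONDITION & SPEC =====
-- Pre_ restricts to positive quota, the natural domain of a weighted-voting game: with
-- quota ≤ 0 the empty coalition already wins, no voter is ever pivotal and no specification
-- exists (A credits all n! orderings to the last voter through power[-1] with prev = -1,
-- and raises IndexError on empty weight; B credits none).
def Pre_shapley_shubik (weight : List Int) (quota : Int) : Prop := 0 < quota
instance (weight : List Int) (quota : Int) : Decidable (Pre_shapley_shubik weight quota) := by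
  unfold Pre_shapley_shubik; infer_instance

def pvWitness_shapley_shubik : List Int × Int := ([3, 2, 1], 4)

def Spec_shapley_shubik (weight : List Int) (quota : Int) (out : List Int) : Prop := out = shapley_shubik_alt weight quota
instance (weight : List Int) (quota : Int) (out : List Int) : Decidable (Spec_shapley_shubik weight quota out) := by unfold Spec_shapley_shubik; infer_instance

-- ===== CLAIM (what is proved, stated in full; the proofs are below) =====
def Claim_equal_shapley_shubik : Prop := ∀ (weight : List Int) (quota : Int), Dom_shapley_shubik weight quota → Pre_shapley_shubik weight quota → Spec_shapley_shubik weight quota (shapley_shubik weight quota)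

-- ===== LEMMAS AND PROOFS =====

-- ---------- shared spec-level definitions ----------

/-- `weight[i]` for an in-range natural index. -/
def wiv (w : List Int) (i : Nat) : Int := w.getD i 0

/-- `k!` as an integer. -/
def fac (k : Nat) : Int := (Nat.factorial k : Int)

/-- the set-bit positions of a mask (every bit index `i` satisfies `i < 2^i ≤ s < s+1`). -/
def bitsFin (s : Nat) : Finset Nat := (Finset.range (s + 1)).filter (fun i => s.testBit i)

/-- summed weight of the players in a mask. -/
def totalw (w : List Int) (s : Nat) : Int := ∑ i ∈ bitsFin s, wiv w i

/-- number of players in a mask. -/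
def pcs (s : Nat) : Nat := (bitsFin s).card

theorem testBit_two_pow_le {s i : Nat} (h : s.testBit i = true) : 2 ^ i ≤ s := by
  by_contra hlt
  rw [Nat.testBit_lt_two_pow (by omega)] at h
  exact Bool.false_ne_true h

theorem mem_bitsFin {s i : Nat} : i ∈ bitsFin s ↔ s.testBit i = true := by
  unfold bitsFin
  simp only [Finset.mem_filter, Finset.mem_range]
  constructor
  · exact fun h => h.2
  · intro h
    have h2 := testBit_two_pow_le h
    have h3 : i < 2 ^ i := Nat.lt_two_pow_self
    exact ⟨by omega, h⟩

theorem xor_two_pow_lt {s i : Nat} (h : s.testBit i = true) : s ^^^ (1 <<< i) < s := by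
  rw [Nat.one_shiftLeft]
  refine Nat.lt_of_testBit i ?_ h ?_
  · rw [Nat.testBit_xor, h, Nat.testBit_two_pow_self]
    rfl
  · intro j hj
    rw [Nat.testBit_xor, Nat.testBit_two_pow_of_ne (by omega)]
    simp

theorem testBit_xor_pow (s i k : Nat) :
    (s ^^^ (1 <<< i)).testBit k = if k = i then !(s.testBit k) else s.testBit k := by
  rw [Nat.one_shiftLeft, Nat.testBit_xor]
  by_cases hk : k = i
  · subst hk; simp [Nat.testBit_two_pow_self, Bool.xor_comm]
  · simp [Nat.testBit_two_pow_of_ne (Ne.symm hk), hk]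

theorem bitsFin_xor {s i : Nat} (h : s.testBit i = true) :
    bitsFin (s ^^^ (1 <<< i)) = (bitsFin s).erase i := by
  ext k
  simp only [mem_bitsFin, Finset.mem_erase, testBit_xor_pow]
  by_cases hk : k = i
  · subst hk; simp [h]
  · simp [hk]

theorem totalw_xor (w : List Int) {s i : Nat} (h : s.testBit i = true) :
    totalw w (s ^^^ (1 <<< i)) = totalw w s - wiv w i := by
  unfold totalw
  rw [bitsFin_xor h, Finset.sum_erase_eq_sub (mem_bitsFin.mpr h)]

theorem pcs_xor {s i : Nat} (h : s.testBit i = true) :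
    pcs (s ^^^ (1 <<< i)) = pcs s - 1 ∧ 1 ≤ pcs s := by
  unfold pcs
  rw [bitsFin_xor h, Finset.card_erase_of_mem (mem_bitsFin.mpr h)]
  exact ⟨rfl, Finset.card_pos.mpr ⟨i, mem_bitsFin.mpr h⟩⟩

/-- number of orderings of the players in `mask` in which every proper prefix (the empty one
included) keeps the running total below `r` (the B spec: `orders[mask]`). -/
def Nspec (w : List Int) (r : Int) (mask : Nat) : Int :=
  if mask = 0 then (if 0 < r then 1 else 0)
  else if totalw w mask < r then
    ∑ j ∈ (bitsFin mask).attach, Nspec w r (mask ^^^ (1 <<< j.1))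
  else 0
termination_by mask
decreasing_by exact xor_two_pow_lt (mem_bitsFin.mp j.2)

/-- the mask of a list of player indices. -/
def maskOf (L : List Nat) : Nat := L.foldr (fun i M => M ||| (1 <<< i)) 0

/-- all submasks of `M`. -/
def subsF (M : Nat) : Finset Nat := (Finset.range (M + 1)).filter (fun s => s &&& M = s)

/-- closed-form contribution of pivot `j` after some below-quota coalition drawn from the
players of mask `M` (the other `L` players in the game, `j` among them, `j ∉ M`). -/
def pvCon (w : List Int) (r : Int) (M : Nat) (j : Nat) (L : Nat) : Int :=
  ∑ s ∈ subsF M, Nspec w r s * (if r ≤ totalw w s + wiv w j then fac (L - 1 - pcs s) else 0)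

-- ---------- the fueled list-world reference for A (mirrors pvRec/pvWalk) ----------

mutual
def recL (w : List Int) (remain : Int) (avail : List Nat) (prev : Int)
    (power : List Int) (fuel : Nat) : List Int :=
  match fuel with
  | 0 => power
  | fuel + 1 =>
    if remain ≤ 0 then
      PySem.List.pySetD power prev (PySem.List.pyGetD power prev 0 + fac avail.length)
    else recGo w remain avail avail power fuel
termination_by (fuel, 0)
decreasing_by all_goals simp [Prod.lex_def]

def recGo (w : List Int) (remain : Int) (avail todo : List Nat)
    (power : List Int) (fuel : Nat) : List Int :=
  match todo with
  | [] => power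
  | i :: rest =>
      recGo w remain avail rest
        (recL w (remain - wiv w i) (avail.erase i) (i : Int) power fuel) fuel
termination_by (fuel, todo.length + 1)
end

-- ---------- Part II: the dancing-links encoding ----------

/-- `arr`-pointers chain from node `f` through the nodes of `L` to node `t`. -/
def LinkedTo (arr : List Int) (f : Nat) (L : List Nat) (t : Nat) : Prop :=
  match L with
  | [] => arr.getD f 0 = (t : Int)
  | a :: rest => arr.getD f 0 = (a : Int) ∧ LinkedTo arr a rest t

/-- the left/right arrays encode the circular list `nn :: avail` (ln = rn of the reverse). -/
def Enc (nn : Nat) (avail : List Nat) (ln rn : List Int) : Prop :=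
  ln.length = nn + 1 ∧ rn.length = nn + 1 ∧ avail.Nodup ∧ (∀ x ∈ avail, x < nn) ∧
  LinkedTo rn nn avail nn ∧ LinkedTo ln nn avail.reverse nn

theorem getD_set_ne' {l : List Int} {i j : Nat} {v : Int} (h : i ≠ j) :
    (l.set i v).getD j 0 = l.getD j 0 := by
  simp [List.getD_eq_getElem?_getD, List.getElem?_set_ne h]

theorem getD_set_self' {l : List Int} {i : Nat} {v : Int} (h : i < l.length) :
    (l.set i v).getD i 0 = v := by
  simp [List.getD_eq_getElem?_getD, List.getElem?_set_self h]

theorem LinkedTo_append {arr : List Int} {f b t : Nat} {xs ys : List Nat} :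
    LinkedTo arr f (xs ++ b :: ys) t ↔ LinkedTo arr f xs b ∧ LinkedTo arr b ys t := by
  induction xs generalizing f with
  | nil => simp [LinkedTo]
  | cons a xs ih => simp [LinkedTo, ih, and_assoc]

theorem LinkedTo_set {arr : List Int} {f t : Nat} {xs : List Nat} {k : Nat} {v : Int}
    (hk : k ≠ f) (hx : k ∉ xs) : LinkedTo (arr.set k v) f xs t ↔ LinkedTo arr f xs t := by
  induction xs generalizing f with
  | nil =>
      simp only [LinkedTo]
      rw [getD_set_ne' (by omega)]
  | cons a xs ih =>
      simp only [LinkedTo]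
      simp only [List.mem_cons, not_or] at hx
      rw [getD_set_ne' (by omega), ih hx.1 hx.2]

theorem pvFactFill_getD :
    ∀ (fl : Nat) (facts : List Int) (n : Int), fl = (n + 1 - (facts.length : Int)).toNat →
    facts ≠ [] → (∀ j : Nat, j < facts.length → facts.getD j 0 = fac j) →
    ∀ j : Nat, ((j : Int) ≤ n ∨ j < facts.length) → (pvFactFill facts n).getD j 0 = fac j := by
  intro fl
  induction fl using Nat.strong_induction_on with
  | _ fl IH =>
  intro facts n hfl h0 hinv j hj
  rw [pvFactFill]
  by_cases hc : (facts.length : Int) < n + 1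
  · rw [if_pos hc]
    have hlen0 : facts.length - 1 < facts.length := by
      cases facts with
      | nil => exact absurd rfl h0
      | cons a l => simp
    have hlast : PySem.List.pyGetD facts (-1) 0 = fac (facts.length - 1) := by
      rw [PySem.List.pyGetD_neg_one facts 0 h0, List.getLast_eq_getElem,
        ← List.getD_eq_getElem facts 0 hlen0]
      exact hinv _ hlen0
    rw [hlast]
    apply IH ((n + 1 - ((facts.length : Int) + 1)).toNat) (by omega)
      (facts ++ [(facts.length : Int) * fac (facts.length - 1)]) n
      (by simp only [List.length_append, List.length_cons, List.length_nil]; push_cast; omega)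
      (by simp)
    · intro j hj
      simp only [List.length_append, List.length_cons, List.length_nil] at hj
      rw [List.getD_eq_getElem?_getD]
      by_cases hje : j < facts.length
      · rw [List.getElem?_append_left hje, ← List.getD_eq_getElem?_getD]
        exact hinv j hje
      · have hje' : j = facts.length := by omega
        subst hje'
        rw [List.getElem?_append_right (by omega)]
        simp only [Nat.sub_self, List.getElem?_cons_zero, Option.getD_some]
        have h1 : 1 ≤ facts.length := by
          cases facts with
          | nil => exact absurd rfl h0
          | cons a l => simp
        unfold fac
        rw [show facts.length = (facts.length - 1) + 1 by omega, Nat.factorial_succ]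
        push_cast
        ring
    · rcases hj with h | h
      · left; exact h
      · left; omega
  · rw [if_neg hc]
    apply hinv
    rcases hj with h | h
    · omega
    · exact h

theorem pvFact_natCast (k : Nat) : pvFact ((k : Nat) : Int) = fac k := by
  unfold pvFact
  rw [PySem.List.pyGetD_natCast]
  apply pvFactFill_getD _ [1] _ rfl (by simp)
  · intro j hj
    have hj0 : j = 0 := by simpa using hj
    subst hj0
    simp [fac, Nat.factorial]
  · left; omega

theorem set_getD_self {l : List Int} {i : Nat} (h : i < l.length) : l.set i (l.getD i 0) = l := by
  rw [List.getD_eq_getElem l 0 h, List.set_getElem_self]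

theorem LT_head {arr : List Int} {f t : Nat} {L : List Nat} (h : LinkedTo arr f L t) :
    arr.getD f 0 = ((L.headD t : Nat) : Int) := by
  cases L with
  | nil => exact h
  | cons a L => exact h.1

theorem getLastD_mem (L : List Nat) (a : Nat) : L.getLastD a = a ∨ L.getLastD a ∈ L := by
  induction L generalizing a with
  | nil => simp [List.getLastD]
  | cons x L ih =>
      rw [List.getLastD_cons]
      right
      rcases ih x with h | h
      · rw [h]; exact List.mem_cons_self
      · exact List.mem_cons_of_mem _ h

theorem getLastD_mem_cons (d : Nat) (ds : List Nat) (a : Nat) : (d :: ds).getLastD a ∈ d :: ds := by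
  induction ds generalizing d with
  | nil => simp [List.getLastD]
  | cons x L ih => rw [List.getLastD_cons]; exact List.mem_cons_of_mem _ (ih x)

theorem LT_last {arr : List Int} {f t : Nat} {L : List Nat} (h : LinkedTo arr f L t) :
    arr.getD (L.getLastD f) 0 = (t : Int) := by
  induction L generalizing f with
  | nil => exact h
  | cons a L ih => rw [List.getLastD_cons]; exact ih h.2

theorem LT_retarget {arr : List Int} {t : Nat} {L : List Nat} :
    ∀ {f b : Nat}, (f :: L).Nodup → (∀ x ∈ f :: L, x < arr.length) → LinkedTo arr f L t →
    LinkedTo (arr.set (L.getLastD f) ((b : Nat) : Int)) f L b := by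
  induction L with
  | nil =>
      intro f b _ hbnd h
      exact getD_set_self' (hbnd f (by simp))
  | cons a L ih =>
      intro f b hn hbnd h
      refine ⟨?_, ?_⟩
      · rw [List.getLastD_cons]
        have hne : L.getLastD a ≠ f := by
          intro he
          simp only [List.nodup_cons, List.mem_cons, not_or] at hn
          rcases getLastD_mem L a with h | h
          · rw [he] at h; exact hn.1.1 h
          · rw [he] at h; exact hn.1.2 h
        rw [getD_set_ne' hne]
        exact h.1
      · rw [List.getLastD_cons]
        exact ih (by simp only [List.nodup_cons] at hn ⊢; tauto)
          (by intro x hx; exact hbnd x (by simp at hx ⊢; tauto)) h.2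

/-- splicing the head of `todo` out of an encoded circular list. -/
theorem Enc_splice {nn : Nat} {done rest : List Nat} {t : Nat} {ln rn : List Int}
    (henc : Enc nn (done ++ t :: rest) ln rn) :
    Enc nn (done ++ rest)
      (ln.set (rest.headD nn) ((done.getLastD nn : Nat) : Int))
      (rn.set (done.getLastD nn) ((rest.headD nn : Nat) : Int)) := by
  obtain ⟨h1, h2, h3, h4, h5, h6⟩ := henc
  have hdnodup : done.Nodup := (List.nodup_append.mp h3).1
  have hcons : (t :: rest).Nodup := (List.nodup_append.mp h3).2.1
  have hrnodup : rest.Nodup := (List.nodup_cons.mp hcons).2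
  have htrest : t ∉ rest := (List.nodup_cons.mp hcons).1
  have hdisj : done.Disjoint (t :: rest) := List.disjoint_of_nodup_append h3
  have hbd : ∀ x ∈ done, x < nn := fun x hx => h4 x (by simp [hx])
  have hbr : ∀ x ∈ rest, x < nn := fun x hx => h4 x (by simp [hx])
  have htn : t < nn := h4 t (by simp)
  have hnnd : nn ∉ done := fun h => by have := hbd nn h; omega
  have hnnr : nn ∉ rest := fun h => by have := hbr nn h; omega
  have chains := LinkedTo_append.mp h5
  have hrevsplit : (done ++ t :: rest).reverse = rest.reverse ++ t :: done.reverse := by simp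
  have chainsL := LinkedTo_append.mp (hrevsplit ▸ h6)
  have hpd_cases := getLastD_mem done nn
  have hqrev : rest.reverse.getLastD nn = rest.headD nn := by
    simp [List.getLastD_eq_getLast?, List.getLast?_reverse, List.headD_eq_head?]
  refine ⟨by simp [h1], by simp [h2], ?_, ?_, ?_, ?_⟩
  · exact List.Nodup.sublist (List.Sublist.append (List.Sublist.refl done)
      (List.sublist_cons_self t rest)) h3
  · intro x hx
    rcases List.mem_append.mp hx with h | h
    · exact hbd x h
    · exact hbr x h
  · -- right-pointer chain on done ++ rest
    cases rest with
    | nil =>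
        simp only [List.headD_nil, List.append_nil]
        exact LT_retarget (List.nodup_cons.mpr ⟨hnnd, hdnodup⟩)
          (by intro x hx; rcases List.mem_cons.mp hx with h | h
              · omega
              · have := hbd x h; omega) chains.1
    | cons b rest' =>
        simp only [List.headD_cons]
        rw [LinkedTo_append]
        refine ⟨LT_retarget (List.nodup_cons.mpr ⟨hnnd, hdnodup⟩)
          (by intro x hx; rcases List.mem_cons.mp hx with h | h
              · omega
              · have := hbd x h; omega) chains.1, ?_⟩
        rw [LinkedTo_set ?_ ?_]
        · exact chains.2.2
        · rcases hpd_cases with h | h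
          · intro he; rw [h] at he; exact absurd (hbr b (by simp)) (by omega)
          · intro he; rw [he] at h; exact hdisj h (by simp)
        · rcases hpd_cases with h | h
          · intro hmem; rw [h] at hmem; exact hnnr (by simp [hmem])
          · intro hmem
            exact hdisj h (by simp only [List.mem_cons]; tauto)
  · -- left-pointer chain on (done ++ rest).reverse
    rw [List.reverse_append]
    cases done with
    | nil =>
        simp only [List.getLastD_nil, List.reverse_nil, List.append_nil]
        rw [← hqrev]
        exact LT_retarget
          (List.nodup_cons.mpr ⟨fun h => hnnr (List.mem_reverse.mp h), List.nodup_reverse.mpr hrnodup⟩)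
          (by intro x hx; rcases List.mem_cons.mp hx with h | h
              · omega
              · have := hbr x (List.mem_reverse.mp h); omega) chainsL.1
    | cons d ds =>
        rcases hrev2 : (d :: ds).reverse with _ | ⟨x, xs⟩
        · exact absurd (congrArg List.length hrev2) (by simp)
        · have hx : x = (d :: ds).getLastD nn := by
            have h7 := List.head?_reverse (l := d :: ds)
            rw [hrev2] at h7
            simp only [List.head?_cons] at h7
            rw [List.getLastD_eq_getLast?, ← h7]
            rfl
          subst hx
          rw [LinkedTo_append]
          have hchainL2 := hrev2 ▸ chainsL.2
          refine ⟨?_, ?_⟩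
          · rw [← hqrev]
            exact LT_retarget
              (List.nodup_cons.mpr ⟨fun h => hnnr (List.mem_reverse.mp h),
                List.nodup_reverse.mpr hrnodup⟩)
              (by intro y hy; rcases List.mem_cons.mp hy with h | h
                  · omega
                  · have := hbr y (List.mem_reverse.mp h); omega) chainsL.1
          · rw [LinkedTo_set ?_ ?_]
            · exact hchainL2.2
            · -- rest.headD nn ≠ last of done (the last of done is in done)
              have hpdmem : (d :: ds).getLastD nn ∈ d :: ds := getLastD_mem_cons d ds nn
              intro he
              cases rest with
              | nil =>
                  simp only [List.headD_nil] at he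
                  rw [← he] at hpdmem
                  exact hnnd hpdmem
              | cons b r =>
                  simp only [List.headD_cons] at he
                  rw [← he] at hpdmem
                  exact hdisj hpdmem (by simp)
            · -- rest.headD nn ∉ xs (xs ⊆ done)
              intro hmem
              have hxs : ∀ y ∈ xs, y ∈ (d :: ds) := by
                intro y hy
                have h8 : y ∈ (d :: ds).reverse := by rw [hrev2]; simp [hy]
                exact List.mem_reverse.mp h8
              have hin : rest.headD nn ∈ (d :: ds) := hxs _ hmem
              cases rest with
              | nil =>
                  simp only [List.headD_nil] at hin
                  exact hnnd hin
              | cons b r =>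
                  simp only [List.headD_cons] at hin
                  exact hdisj hin (by simp)

-- ---------- Part III: recL computes the closed-form contributions ----------

theorem sum_erase_swap (B : Finset Nat) (g : Nat → Nat → Int) :
    ∑ j ∈ B, ∑ i ∈ B.erase j, g i j = ∑ i ∈ B, ∑ j ∈ B.erase i, g i j := by
  have he : ∀ j : Nat, B.erase j = B.filter (fun i => i ≠ j) := by
    intro j; ext i; simp [Finset.mem_erase, Finset.mem_filter, and_comm]
  calc ∑ j ∈ B, ∑ i ∈ B.erase j, g i j
      = ∑ j ∈ B, ∑ i ∈ B, if i ≠ j then g i j else 0 := by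
        refine Finset.sum_congr rfl fun j _ => ?_
        rw [he j, Finset.sum_filter]
    _ = ∑ i ∈ B, ∑ j ∈ B, if i ≠ j then g i j else 0 := Finset.sum_comm
    _ = ∑ i ∈ B, ∑ j ∈ B.erase i, g i j := by
        refine Finset.sum_congr rfl fun i _ => ?_
        rw [he i, Finset.sum_filter]
        refine Finset.sum_congr rfl fun j _ => ?_
        simp only [ne_comm]

theorem mem_subsF {s M : Nat} :
    s ∈ subsF M ↔ ∀ k, s.testBit k = true → M.testBit k = true := by
  unfold subsF
  simp only [Finset.mem_filter, Finset.mem_range]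
  constructor
  · rintro ⟨_, h⟩ k hk
    rw [← h, Nat.testBit_and] at hk
    simp only [Bool.and_eq_true] at hk
    exact hk.2
  · intro h
    have he : s &&& M = s := Nat.eq_of_testBit_eq fun k => by
      rw [Nat.testBit_and]
      cases hk : s.testBit k
      · simp
      · simp [h k hk]
    have hle : s ≤ M := by
      have h2 : s &&& M ≤ M := Nat.and_le_right
      omega
    exact ⟨by omega, he⟩

theorem Nspec_zero (w : List Int) (r : Int) : Nspec w r 0 = if 0 < r then 1 else 0 := by
  rw [Nspec]
  simp

theorem Nspec_pos_zero (w : List Int) {r : Int} (hr : 0 < r) : Nspec w r 0 = 1 := by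
  rw [Nspec_zero, if_pos hr]

theorem Nspec_eq (w : List Int) (r : Int) {mask : Nat} (h : mask ≠ 0) :
    Nspec w r mask = if totalw w mask < r then
      ∑ j ∈ bitsFin mask, Nspec w r (mask ^^^ (1 <<< j)) else 0 := by
  rw [Nspec, if_neg h]
  by_cases ht : totalw w mask < r
  · rw [if_pos ht, if_pos ht, ← Finset.sum_attach (bitsFin mask)
      (fun j => Nspec w r (mask ^^^ (1 <<< j)))]
  · rw [if_neg ht, if_neg ht]

theorem bitsFin_two_pow (j : Nat) : bitsFin (1 <<< j) = {j} := by
  ext k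
  rw [mem_bitsFin, Nat.one_shiftLeft, Finset.mem_singleton]
  by_cases hk : k = j
  · subst hk; simp [Nat.testBit_two_pow_self]
  · simp [Nat.testBit_two_pow_of_ne (Ne.symm hk), hk]

theorem totalw_two_pow (w : List Int) (j : Nat) : totalw w (1 <<< j) = wiv w j := by
  unfold totalw
  rw [bitsFin_two_pow, Finset.sum_singleton]

theorem xor_swap_pow (mask i j : Nat) :
    (mask ^^^ (1 <<< i)) ^^^ (1 <<< j) = (mask ^^^ (1 <<< j)) ^^^ (1 <<< i) := by
  rw [Nat.xor_assoc, Nat.xor_comm (1 <<< i), ← Nat.xor_assoc]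

theorem Nspec_peel (w : List Int) (r : Int) (hr : 0 < r) {mask : Nat} (h : mask ≠ 0) :
    Nspec w r mask =
      ∑ i ∈ bitsFin mask,
        (if 0 < r - wiv w i then Nspec w (r - wiv w i) (mask ^^^ (1 <<< i)) else 0) := by
  have main : ∀ (mask : Nat) (r : Int), 0 < r → mask ≠ 0 →
      Nspec w r mask =
        ∑ i ∈ bitsFin mask,
          (if 0 < r - wiv w i then Nspec w (r - wiv w i) (mask ^^^ (1 <<< i)) else 0) := by
    intro mask
    induction mask using Nat.strong_induction_on with
    | _ mask IH =>
    intro r hr h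
    by_cases hsing : ∃ j, mask = 1 <<< j
    · obtain ⟨j, rfl⟩ := hsing
      rw [Nspec_eq w r (by omega), bitsFin_two_pow, totalw_two_pow, Finset.sum_singleton,
        Finset.sum_singleton, Nat.xor_self]
      by_cases hw : wiv w j < r
      · rw [if_pos hw, if_pos (by omega), Nspec_pos_zero w hr, Nspec_pos_zero w (by omega)]
      · rw [if_neg hw, if_neg (by omega)]
    · have hsub : ∀ j, mask.testBit j = true → mask ^^^ (1 <<< j) ≠ 0 := by
        intro j _ he
        rw [Nat.xor_eq_zero_iff] at he
        exact hsing ⟨j, he⟩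
      rw [Nspec_eq w r h]
      by_cases ht : totalw w mask < r
      · rw [if_pos ht]
        calc ∑ j ∈ bitsFin mask, Nspec w r (mask ^^^ (1 <<< j))
            = ∑ j ∈ bitsFin mask, ∑ i ∈ (bitsFin mask).erase j,
                (if 0 < r - wiv w i then
                  Nspec w (r - wiv w i) ((mask ^^^ (1 <<< j)) ^^^ (1 <<< i)) else 0) := by
              refine Finset.sum_congr rfl fun j hj => ?_
              rw [IH (mask ^^^ (1 <<< j)) (xor_two_pow_lt (mem_bitsFin.mp hj)) r hr
                (hsub j (mem_bitsFin.mp hj)), bitsFin_xor (mem_bitsFin.mp hj)]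
          _ = ∑ i ∈ bitsFin mask, ∑ j ∈ (bitsFin mask).erase i,
                (if 0 < r - wiv w i then
                  Nspec w (r - wiv w i) ((mask ^^^ (1 <<< j)) ^^^ (1 <<< i)) else 0) :=
              sum_erase_swap _ _
          _ = ∑ i ∈ bitsFin mask,
                (if 0 < r - wiv w i then Nspec w (r - wiv w i) (mask ^^^ (1 <<< i)) else 0) := by
              refine Finset.sum_congr rfl fun i hi => ?_
              have hib := mem_bitsFin.mp hi
              by_cases hwi : 0 < r - wiv w i
              · simp only [if_pos hwi]
                rw [Nspec_eq w (r - wiv w i) (hsub i hib)]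
                rw [if_pos (by rw [totalw_xor w hib]; omega)]
                rw [bitsFin_xor hib]
                refine Finset.sum_congr rfl fun j _ => ?_
                rw [xor_swap_pow]
              · simp only [if_neg hwi]
                exact Finset.sum_eq_zero fun j _ => by simp [hwi]
      · rw [if_neg ht]
        symm
        refine Finset.sum_eq_zero fun i hi => ?_
        have hib := mem_bitsFin.mp hi
        by_cases hwi : 0 < r - wiv w i
        · rw [if_pos hwi, Nspec_eq w (r - wiv w i) (hsub i hib),
            if_neg (by rw [totalw_xor w hib]; omega)]
        · rw [if_neg hwi]
  exact main mask r hr h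

theorem totalw_zero (w : List Int) : totalw w 0 = 0 := by
  unfold totalw bitsFin
  simp [Nat.zero_testBit]

theorem pcs_zero : pcs 0 = 0 := by
  unfold pcs bitsFin
  simp [Nat.zero_testBit]

theorem zero_mem_subsF (M : Nat) : 0 ∈ subsF M :=
  mem_subsF.mpr fun k hk => by rw [Nat.zero_testBit] at hk; cases hk

theorem xor_pow_cancel (s a : Nat) : (s ^^^ a) ^^^ a = s := by
  rw [Nat.xor_assoc, Nat.xor_self, Nat.xor_zero]

theorem bitsFin_filter_of_subsF {s M : Nat} (h : s ∈ subsF M) :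
    bitsFin s = (bitsFin M).filter (fun i => s.testBit i) := by
  ext k
  simp only [mem_bitsFin, Finset.mem_filter]
  constructor
  · intro hk
    exact ⟨mem_subsF.mp h k hk, hk⟩
  · exact fun hk => hk.2

theorem key_identity (w : List Int) (r : Int) (hr : 0 < r) {M j : Nat}
    (hj : M.testBit j = true) :
    (∑ i ∈ bitsFin M,
      (if r - wiv w i ≤ 0 then (if i = j then fac (pcs M - 1) else 0)
       else if (M ^^^ (1 <<< i)).testBit j = true then
         pvCon w (r - wiv w i) ((M ^^^ (1 <<< i)) ^^^ (1 <<< j)) j (pcs M - 1)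
       else 0))
    = pvCon w r (M ^^^ (1 <<< j)) j (pcs M) := by
  classical
  have hjM' : (M ^^^ (1 <<< j)).testBit j = false := by
    rw [testBit_xor_pow]; simp [hj]
  have hbM' : bitsFin (M ^^^ (1 <<< j)) = (bitsFin M).erase j := bitsFin_xor hj
  -- split both sides: LHS at i = j, RHS at s = 0
  rw [← Finset.add_sum_erase _ _ (mem_bitsFin.mpr hj)]
  have hsplitR : pvCon w r (M ^^^ (1 <<< j)) j (pcs M) =
      Nspec w r 0 * (if r ≤ totalw w 0 + wiv w j then fac (pcs M - 1 - pcs 0) else 0) +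
      ∑ s ∈ (subsF (M ^^^ (1 <<< j))).erase 0,
        Nspec w r s * (if r ≤ totalw w s + wiv w j then fac (pcs M - 1 - pcs s) else 0) := by
    unfold pvCon
    rw [← Finset.add_sum_erase _ _ (zero_mem_subsF (M ^^^ (1 <<< j)))]
  rw [hsplitR]
  have hstepj : (if r - wiv w j ≤ 0 then (if j = j then fac (pcs M - 1) else 0)
      else if (M ^^^ (1 <<< j)).testBit j = true then
        pvCon w (r - wiv w j) ((M ^^^ (1 <<< j)) ^^^ (1 <<< j)) j (pcs M - 1)
      else 0)
      = Nspec w r 0 * (if r ≤ totalw w 0 + wiv w j then fac (pcs M - 1 - pcs 0) else 0) := by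
    rw [Nspec_pos_zero w hr, one_mul, totalw_zero, pcs_zero, if_pos rfl]
    simp only [hjM', Bool.false_eq_true, if_false]
    by_cases hc : r - wiv w j ≤ 0
    · rw [if_pos hc, if_pos (by omega), Nat.sub_zero]
    · rw [if_neg hc, if_neg (by omega)]
  rw [hstepj]
  congr 1
  -- the nonzero coalitions against the remaining players
  calc ∑ i ∈ (bitsFin M).erase j,
        (if r - wiv w i ≤ 0 then (if i = j then fac (pcs M - 1) else 0)
         else if (M ^^^ (1 <<< i)).testBit j = true then
           pvCon w (r - wiv w i) ((M ^^^ (1 <<< i)) ^^^ (1 <<< j)) j (pcs M - 1)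
         else 0)
      = ∑ i ∈ bitsFin (M ^^^ (1 <<< j)),
          (if 0 < r - wiv w i then
            pvCon w (r - wiv w i) ((M ^^^ (1 <<< j)) ^^^ (1 <<< i)) j (pcs M - 1) else 0) := by
        rw [hbM']
        refine Finset.sum_congr rfl fun i hi => ?_
        obtain ⟨hij, hiM⟩ := Finset.mem_erase.mp hi
        have hbit : (M ^^^ (1 <<< i)).testBit j = true := by
          rw [testBit_xor_pow, if_neg (Ne.symm hij)]
          exact hj
        by_cases hw : r - wiv w i ≤ 0
        · rw [if_pos hw, if_neg hij, if_neg (by omega)]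
        · have h0 : (0 : Int) < r - wiv w i := by omega
          rw [if_neg hw, hbit, if_pos rfl, if_pos h0, xor_swap_pow]
    _ = ∑ i ∈ bitsFin (M ^^^ (1 <<< j)),
          ∑ s' ∈ subsF ((M ^^^ (1 <<< j)) ^^^ (1 <<< i)),
            (if 0 < r - wiv w i then Nspec w (r - wiv w i) s' else 0) *
              (if r - wiv w i ≤ totalw w s' + wiv w j then fac (pcs M - 1 - 1 - pcs s') else 0) := by
        refine Finset.sum_congr rfl fun i _ => ?_
        by_cases hw : 0 < r - wiv w i
        · rw [if_pos hw]
          unfold pvCon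
          exact Finset.sum_congr rfl fun s' _ => by rw [if_pos hw]
        · rw [if_neg hw]
          symm
          exact Finset.sum_eq_zero fun s' _ => by rw [if_neg hw, zero_mul]
    _ = ∑ i ∈ bitsFin (M ^^^ (1 <<< j)),
          ∑ s ∈ ((subsF (M ^^^ (1 <<< j))).erase 0).filter (fun s => s.testBit i),
            (if 0 < r - wiv w i then Nspec w (r - wiv w i) (s ^^^ (1 <<< i)) else 0) *
              (if r ≤ totalw w s + wiv w j then fac (pcs M - 1 - pcs s) else 0) := by
        refine Finset.sum_congr rfl fun i hi => ?_
        have hiM' : (M ^^^ (1 <<< j)).testBit i = true := mem_bitsFin.mp hi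
        symm
        refine Finset.sum_nbij' (fun s => s ^^^ (1 <<< i)) (fun s' => s' ^^^ (1 <<< i))
          ?_ ?_ ?_ ?_ ?_
        · intro s hs
          dsimp only
          obtain ⟨hs1, hs2⟩ := Finset.mem_filter.mp hs
          obtain hsub := mem_subsF.mp (Finset.mem_of_mem_erase hs1)
          refine mem_subsF.mpr fun k hk => ?_
          rw [testBit_xor_pow] at hk ⊢
          by_cases hki : k = i
          · subst hki; rw [hs2] at hk; simp at hk
          · rw [if_neg hki] at hk ⊢
            exact hsub k hk
        · intro s' hs'
          dsimp only
          obtain hsub := mem_subsF.mp hs'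
          have hs'i : s'.testBit i = false := by
            by_contra hc
            have := hsub i (by revert hc; cases s'.testBit i <;> simp)
            rw [testBit_xor_pow, if_pos rfl, hiM'] at this
            simp at this
          refine Finset.mem_filter.mpr ⟨Finset.mem_erase.mpr ⟨?_, ?_⟩, ?_⟩
          · intro he
            have : (s' ^^^ (1 <<< i)).testBit i = true := by
              rw [testBit_xor_pow, if_pos rfl, hs'i]; rfl
            rw [he, Nat.zero_testBit] at this
            cases this
          · refine mem_subsF.mpr fun k hk => ?_
            rw [testBit_xor_pow] at hk
            by_cases hki : k = i
            · subst hki; exact hiM'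
            · rw [if_neg hki] at hk
              have := hsub k hk
              rw [testBit_xor_pow, if_neg hki] at this
              exact this
          · rw [testBit_xor_pow, if_pos rfl, hs'i]; rfl
        · intro s _; exact xor_pow_cancel s _
        · intro s' _; exact xor_pow_cancel s' _
        · intro s hs
          dsimp only
          obtain ⟨hs1, hs2⟩ := Finset.mem_filter.mp hs
          have htw : totalw w s = totalw w (s ^^^ (1 <<< i)) + wiv w i := by
            rw [totalw_xor w hs2]; ring
          have hpc : pcs s = pcs (s ^^^ (1 <<< i)) + 1 := by
            obtain ⟨h1, h2⟩ := pcs_xor hs2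
            omega
          congr 1
          rw [htw, hpc]
          by_cases hc : r - wiv w i ≤ totalw w (s ^^^ (1 <<< i)) + wiv w j
          · rw [if_pos (by omega), if_pos hc]
            congr 1
            omega
          · rw [if_neg (by omega), if_neg hc]
    _ = ∑ s ∈ (subsF (M ^^^ (1 <<< j))).erase 0,
          Nspec w r s * (if r ≤ totalw w s + wiv w j then fac (pcs M - 1 - pcs s) else 0) := by
        symm
        calc ∑ s ∈ (subsF (M ^^^ (1 <<< j))).erase 0,
              Nspec w r s * (if r ≤ totalw w s + wiv w j then fac (pcs M - 1 - pcs s) else 0)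
            = ∑ s ∈ (subsF (M ^^^ (1 <<< j))).erase 0,
                ∑ i ∈ bitsFin (M ^^^ (1 <<< j)),
                  (if s.testBit i then
                    (if 0 < r - wiv w i then Nspec w (r - wiv w i) (s ^^^ (1 <<< i)) else 0) *
                      (if r ≤ totalw w s + wiv w j then fac (pcs M - 1 - pcs s) else 0)
                  else 0) := by
              refine Finset.sum_congr rfl fun st hs => ?_
              obtain ⟨hs0, hsS⟩ := Finset.mem_erase.mp hs
              rw [Nspec_peel w r hr hs0, Finset.sum_mul, bitsFin_filter_of_subsF hsS,
                Finset.sum_filter]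
          _ = ∑ i ∈ bitsFin (M ^^^ (1 <<< j)),
                ∑ s ∈ (subsF (M ^^^ (1 <<< j))).erase 0,
                  (if s.testBit i then
                    (if 0 < r - wiv w i then Nspec w (r - wiv w i) (s ^^^ (1 <<< i)) else 0) *
                      (if r ≤ totalw w s + wiv w j then fac (pcs M - 1 - pcs s) else 0)
                  else 0) := Finset.sum_comm
          _ = ∑ i ∈ bitsFin (M ^^^ (1 <<< j)),
                ∑ s ∈ ((subsF (M ^^^ (1 <<< j))).erase 0).filter (fun s => s.testBit i),
                  (if 0 < r - wiv w i then Nspec w (r - wiv w i) (s ^^^ (1 <<< i)) else 0) *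
                    (if r ≤ totalw w s + wiv w j then fac (pcs M - 1 - pcs s) else 0) := by
              refine Finset.sum_congr rfl fun i _ => ?_
              rw [Finset.sum_filter]

theorem maskOf_testBit (L : List Nat) (k : Nat) :
    (maskOf L).testBit k = (decide (k ∈ L)) := by
  induction L with
  | nil => simp [maskOf, Nat.zero_testBit]
  | cons a L ih =>
      show ((maskOf L) ||| (1 <<< a)).testBit k = _
      rw [Nat.testBit_or, ih, Nat.one_shiftLeft]
      by_cases hk : k = a
      · subst hk; simp [Nat.testBit_two_pow_self]
      · simp [Nat.testBit_two_pow_of_ne (Ne.symm hk), hk]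

theorem maskOf_erase {L : List Nat} {i : Nat} (hn : L.Nodup) (hi : i ∈ L) :
    maskOf (L.erase i) = maskOf L ^^^ (1 <<< i) := by
  apply Nat.eq_of_testBit_eq
  intro k
  rw [maskOf_testBit, testBit_xor_pow, maskOf_testBit]
  by_cases hk : k = i
  · subst hk; simp [hn.mem_erase_iff, hi]
  · simp [hn.mem_erase_iff, hk]

theorem bitsFin_maskOf (L : List Nat) : bitsFin (maskOf L) = L.toFinset := by
  ext k
  simp [mem_bitsFin, maskOf_testBit]

theorem pcs_maskOf {L : List Nat} (hn : L.Nodup) : pcs (maskOf L) = L.length := by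
  unfold pcs
  rw [bitsFin_maskOf, List.toFinset_card_of_nodup hn]

theorem recLGo_length (w : List Int) :
    ∀ fuel : Nat,
      (∀ remain avail prev power, (recL w remain avail prev power fuel).length = power.length) ∧
      (∀ remain avail todo power, (recGo w remain avail todo power fuel).length = power.length) := by
  intro fuel
  induction fuel with
  | zero =>
      refine ⟨fun _ _ _ _ => by rw [recL], ?_⟩
      intro remain avail todo
      induction todo with
      | nil => intro power; rw [recGo]
      | cons i rest ih =>
          intro power
          rw [recGo, ih, recL]
  | succ fuel ih =>
      have hL : ∀ remain avail prev power,
          (recL w remain avail prev power (fuel + 1)).length = power.length := by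
        intro remain avail prev power
        rw [recL]
        by_cases hr : remain ≤ 0
        · simp [hr, PySem.List.length_pySetD]
        · simp only [hr, if_false]
          exact ih.2 _ _ _ _
      refine ⟨hL, ?_⟩
      intro remain avail todo
      induction todo with
      | nil => intro power; rw [recGo]
      | cons i rest ihr =>
          intro power
          rw [recGo, ihr, hL]

/-- per-step contribution of opening move `i` to pivot slot `j`. -/
def stepF (w : List Int) (r : Int) (avail : List Nat) (j i : Nat) : Int :=
  if r - wiv w i ≤ 0 then (if i = j then fac (avail.length - 1) else 0)
  else if j ∈ avail.erase i then
    pvCon w (r - wiv w i) (maskOf ((avail.erase i).erase j)) j (avail.length - 1)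
  else 0

theorem sum_map_nodup (f : Nat → Int) :
    ∀ (l : List Nat), l.Nodup → (l.map f).sum = ∑ i ∈ l.toFinset, f i := by
  intro l
  induction l with
  | nil => simp
  | cons a l ih =>
      intro hnd
      obtain ⟨ha, hl⟩ := List.nodup_cons.mp hnd
      rw [List.map_cons, List.sum_cons, List.toFinset_cons,
        Finset.sum_insert (by simp [ha]), ih hl]

/-- the central characterisation of A's recursion. -/
theorem recL_getD (w : List Int) :
    ∀ (s : Nat) (avail : List Nat), avail.length = s →
    ∀ (r prev : Int) (power : List Int) (fuel j : Nat),
      avail.Nodup → (∀ x ∈ avail, x < power.length) → avail.length + 1 ≤ fuel →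
      j < power.length → (r ≤ 0 → ∃ p : Nat, prev = (p : Int) ∧ p < power.length) →
      (recL w r avail prev power fuel).getD j 0 =
        power.getD j 0 +
          (if r ≤ 0 then (if prev = (j : Int) then fac avail.length else 0)
           else if j ∈ avail then pvCon w r (maskOf (avail.erase j)) j avail.length else 0) := by
  intro s
  induction s using Nat.strong_induction_on with
  | _ s IH =>
  intro avail hlen r prev power fuel j hnd hbound hfuel hj hprev
  cases fuel with
  | zero => omega
  | succ fuel =>
  rw [recL]
  by_cases hr : r ≤ 0
  · rw [if_pos hr, if_pos hr]
    obtain ⟨p, hp, hplen⟩ := hprev hr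
    subst hp
    rw [PySem.List.pySetD_natCast, PySem.List.pyGetD_natCast]
    by_cases hpj : p = j
    · subst hpj
      rw [getD_set_self' (by omega), if_pos rfl]
    · rw [getD_set_ne' hpj, if_neg (by simp only [ne_eq, Nat.cast_inj]; omega)]
      omega
  · rw [if_neg hr, if_neg hr]
    have hGo : ∀ (todo : List Nat), (∀ x ∈ todo, x ∈ avail) →
        ∀ (power' : List Int), power'.length = power.length →
        (recGo w r avail todo power' fuel).getD j 0 =
          power'.getD j 0 + (todo.map (stepF w r avail j)).sum := by
      intro todo
      induction todo with
      | nil =>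
          intro _ power' _
          rw [recGo]
          simp
      | cons i rest ihT =>
          intro hmem power' hplen'
          have hi : i ∈ avail := hmem i (by simp)
          have hs1 : 1 ≤ s := by
            rw [← hlen]
            exact List.length_pos_of_mem hi
          have hlen1 : (avail.erase i).length = s - 1 := by
            rw [List.length_erase_of_mem hi, hlen]
          rw [recGo]
          have hT := ihT (fun x hx => hmem x (by simp [hx]))
            (recL w (r - wiv w i) (avail.erase i) ((i : Nat) : Int) power' fuel)
            (((recLGo_length w fuel).1 _ _ _ _).trans hplen')
          rw [hT]
          have hrec := IH (s - 1) (by omega) (avail.erase i) hlen1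
            (r - wiv w i) ((i : Nat) : Int) power' fuel j
            (hnd.erase i)
            (fun x hx => by rw [hplen']; exact hbound x (List.mem_of_mem_erase hx))
            (by omega)
            (by omega)
            (fun _ => ⟨i, rfl, by rw [hplen']; exact hbound i hi⟩)
          rw [hrec]
          have hstep : (if r - wiv w i ≤ 0 then
                (if ((i : Nat) : Int) = ((j : Nat) : Int) then fac (avail.erase i).length else 0)
              else if j ∈ (avail.erase i) then
                pvCon w (r - wiv w i) (maskOf ((avail.erase i).erase j)) j (avail.erase i).length
              else 0) = stepF w r avail j i := by
            unfold stepF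
            rw [List.length_erase_of_mem hi]
            by_cases hc : r - wiv w i ≤ 0
            · rw [if_pos hc, if_pos hc]
              by_cases hij : i = j
              · subst hij; rw [if_pos rfl, if_pos rfl]
              · rw [if_neg (by simp only [ne_eq, Nat.cast_inj]; omega),
                  if_neg hij]
            · rw [if_neg hc, if_neg hc]
          rw [hstep, List.map_cons, List.sum_cons]
          ring
    rw [hGo avail (fun x hx => hx) power rfl]
    rw [sum_map_nodup _ avail hnd]
    by_cases hjav : j ∈ avail
    · rw [if_pos hjav]
      have hMj : (maskOf avail).testBit j = true := by
        rw [maskOf_testBit]; simp [hjav]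
      have hkey := key_identity w r (by omega) hMj
      have hterm : ∀ i ∈ avail.toFinset, stepF w r avail j i =
          (if r - wiv w i ≤ 0 then (if i = j then fac (pcs (maskOf avail) - 1) else 0)
           else if ((maskOf avail) ^^^ (1 <<< i)).testBit j = true then
             pvCon w (r - wiv w i) (((maskOf avail) ^^^ (1 <<< i)) ^^^ (1 <<< j)) j
               (pcs (maskOf avail) - 1)
           else 0) := by
        intro i hiF
        have hi : i ∈ avail := List.mem_toFinset.mp hiF
        unfold stepF
        rw [pcs_maskOf hnd, ← maskOf_erase hnd hi]
        by_cases hc : r - wiv w i ≤ 0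
        · rw [if_pos hc, if_pos hc]
        · rw [if_neg hc, if_neg hc]
          have hbt : (maskOf (avail.erase i)).testBit j = decide (j ∈ avail.erase i) :=
            maskOf_testBit _ j
          by_cases hje : j ∈ avail.erase i
          · rw [if_pos hje, if_pos (by rw [hbt]; simp [hje]),
              ← maskOf_erase (hnd.erase i) hje]
          · rw [if_neg hje, if_neg (by rw [hbt]; simp [hje])]
      rw [← bitsFin_maskOf avail, Finset.sum_congr rfl (fun i hi =>
        hterm i (by rwa [bitsFin_maskOf] at hi)), hkey]
      rw [pcs_maskOf hnd, ← maskOf_erase hnd hjav]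
    · rw [if_neg hjav]
      have hz : ∑ i ∈ avail.toFinset, stepF w r avail j i = 0 := by
        refine Finset.sum_eq_zero fun i hiF => ?_
        have hi : i ∈ avail := List.mem_toFinset.mp hiF
        unfold stepF
        by_cases hc : r - wiv w i ≤ 0
        · rw [if_pos hc, if_neg (fun he => hjav (by rw [← he]; exact hi))]
        · rw [if_neg hc, if_neg (fun he => hjav (List.mem_of_mem_erase he))]
      rw [hz]

-- ---------- Part IV: the simulation of the dancing-links port by the list world ----------


theorem nodup_len_le {L : List Nat} {nn : Nat} (hnd : L.Nodup) (hb : ∀ x ∈ L, x < nn) :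
    L.length ≤ nn := by
  classical
  have h1 : L.toFinset ⊆ Finset.range nn :=
    fun x hx => Finset.mem_range.mpr (hb x (List.mem_toFinset.mp hx))
  have := Finset.card_le_card h1
  rwa [List.toFinset_card_of_nodup hnd, Finset.card_range] at this

theorem headD_reverse_nat (L : List Nat) (d : Nat) : L.reverse.headD d = L.getLastD d := by
  simp [List.headD_eq_head?, List.head?_reverse, List.getLastD_eq_getLast?]

theorem getLastD_reverse_nat (L : List Nat) (d : Nat) : L.reverse.getLastD d = L.headD d := by
  simp [List.getLastD_eq_getLast?, List.getLast?_reverse, List.headD_eq_head?]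

theorem sim_rec (w : List Int) (nn : Nat) (hw : w.length = nn) :
    ∀ (fuel : Nat) (avail : List Nat) (ln rn power : List Int) (r prev : Int),
      Enc nn avail ln rn →
      pvRec w nn r ((avail.length : Nat) : Int) prev ln rn power fuel =
        (ln, rn, recL w r avail prev power fuel) := by
  intro fuel
  induction fuel with
  | zero => intro avail ln rn power r prev _; rw [pvRec, recL]
  | succ fuel IH =>
    intro avail ln rn power r prev henc
    rw [pvRec, recL]
    by_cases hr : r ≤ 0
    · rw [if_pos hr, if_pos hr, pvFact_natCast]
    · rw [if_neg hr, if_neg hr]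
      have hwalk : ∀ (todo done : List Nat) (ln rn power : List Int) (wfuel : Nat),
          Enc nn (done ++ todo) ln rn → todo.length < wfuel →
          pvWalk w nn r (((done ++ todo).length : Nat) : Int) ((todo.headD nn : Nat) : Int)
              ln rn power fuel wfuel
            = (ln, rn, recGo w r (done ++ todo) todo power fuel) := by
        intro todo
        induction todo with
        | nil =>
            intro done ln rn power wfuel henc2 hwf
            cases wfuel with
            | zero => omega
            | succ wf =>
              rw [pvWalk, recGo]
              simp
        | cons i rest ihW =>
            intro done ln rn power wfuel henc2 hwf
            cases wfuel with
            | zero => simp at hwf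
            | succ wf =>
              obtain ⟨h1, h2, h3, h4, h5, h6⟩ := henc2
              have hiav : i ∈ done ++ i :: rest := by simp
              have hin : i < nn := h4 i hiav
              have hdisj : done.Disjoint (i :: rest) := List.disjoint_of_nodup_append h3
              have hid : i ∉ done := fun h => hdisj h (by simp)
              have hirest : i ∉ rest := (List.nodup_cons.mp (List.nodup_append.mp h3).2.1).1
              have hbd : ∀ x ∈ done, x < nn := fun x hx => h4 x (by simp [hx])
              have hbr : ∀ x ∈ rest, x < nn := fun x hx => h4 x (by simp [hx])
              -- neighbours of i in the circular list
              have hple : done.getLastD nn ≤ nn := by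
                rcases getLastD_mem done nn with h | h
                · omega
                · have := hbd _ h; omega
              have hqle : rest.headD nn ≤ nn := by
                cases rest with
                | nil => simp
                | cons b bs => have := hbr b (by simp); simp; omega
              have hpne : done.getLastD nn ≠ i := by
                intro he
                rcases getLastD_mem done nn with h | h
                · omega
                · rw [he] at h; exact hid h
              have hqne : rest.headD nn ≠ i := by
                cases rest with
                | nil => simp only [List.headD_nil]; omega
                | cons b bs =>
                    simp only [List.headD_cons]
                    intro he; rw [he] at hirest; exact hirest (by simp)
              have chainsR := LinkedTo_append.mp h5
              have hrev : (done ++ i :: rest).reverse = rest.reverse ++ i :: done.reverse := by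
                simp
              have chainsL := LinkedTo_append.mp (hrev ▸ h6)
              have hrnI : rn.getD i 0 = ((rest.headD nn : Nat) : Int) := LT_head chainsR.2
              have hrnP : rn.getD (done.getLastD nn) 0 = ((i : Nat) : Int) := LT_last chainsR.1
              have hlnI : ln.getD i 0 = ((done.getLastD nn : Nat) : Int) := by
                have := LT_head chainsL.2
                rwa [headD_reverse_nat] at this
              have hlnQ : ln.getD (rest.headD nn) 0 = ((i : Nat) : Int) := by
                have := LT_last chainsL.1
                rwa [getLastD_reverse_nat] at this
              have hine : ¬ (((i : Nat) : Int) = ((nn : Nat) : Int)) := by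
                simp only [Nat.cast_inj]; omega
              have hlnrestore : ln.set (rest.headD nn) ((i : Nat) : Int) = ln := by
                rw [← hlnQ]
                exact set_getD_self (by omega)
              have hrnrestore : rn.set (done.getLastD nn) ((i : Nat) : Int) = rn := by
                rw [← hrnP]
                exact set_getD_self (by omega)
              have hsplice := Enc_splice (done := done) (rest := rest) (t := i)
                (ln := ln) (rn := rn) ⟨h1, h2, h3, h4, h5, h6⟩
              have hrec := IH (done ++ rest)
                (ln.set (rest.headD nn) ((done.getLastD nn : Nat) : Int))
                (rn.set (done.getLastD nn) ((rest.headD nn : Nat) : Int)) power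
                (r - w.getD i 0) ((i : Nat) : Int) hsplice
              have hlen1 : (((done ++ i :: rest).length : Nat) : Int) - 1
                  = (((done ++ rest).length : Nat) : Int) := by
                simp only [List.length_append, List.length_cons]
                push_cast; ring
              have herase : (done ++ i :: rest).erase i = done ++ rest := by
                rw [List.erase_append_right _ hid, List.erase_cons_head]
              have hEnc3 : Enc nn ((done ++ [i]) ++ rest) ln rn := by
                have : (done ++ [i]) ++ rest = done ++ i :: rest := by simp
                rw [this]
                exact ⟨h1, h2, h3, h4, h5, h6⟩
              have happ : (done ++ [i]) ++ rest = done ++ i :: rest := by simp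
              have hW := ihW (done ++ [i]) ln rn
                (recL w (r - w.getD i 0) (done ++ rest) ((i : Nat) : Int) power fuel)
                wf hEnc3 (by simp at hwf ⊢; omega)
              rw [happ] at hW
              have hlenW : ((done ++ [i]) ++ rest).length = (done ++ i :: rest).length := by
                rw [happ]
              rw [pvWalk]
              simp only [List.headD_cons]
              rw [if_neg hine]
              simp only [PySem.List.pyGetD_natCast, PySem.List.pySetD_natCast,
                getD_set_ne' hpne, hlnI, hrnI, hlen1]
              rw [hrec]
              simp only [PySem.List.pyGetD_natCast, PySem.List.pySetD_natCast,
                getD_set_ne' hpne, hrnI]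
              rw [List.set_set, hlnrestore]
              simp only [PySem.List.pyGetD_natCast, PySem.List.pySetD_natCast, hlnI]
              rw [List.set_set, hrnrestore]
              simp only [hrnI]
              conv_rhs => rw [recGo]
              simp only [wiv, herase]
              exact hW
      have hstart : PySem.List.pyGetD rn ((nn : Nat) : Int) 0
          = ((avail.headD nn : Nat) : Int) := by
        rw [PySem.List.pyGetD_natCast]
        exact LT_head henc.2.2.2.2.1
      rw [hstart]
      have := hwalk avail [] ln rn power (nn + 1) (by simpa using henc)
        (by
          have := nodup_len_le henc.2.2.1 henc.2.2.2.1
          omega)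
      simpa using this

-- ---------- Part V: B's tables ----------

theorem pvAget_pvAset_self {a : Array Int} {i : Nat} {v : Int} (h : i < a.size) :
    pvAget (pvAset a i v) i = v := by
  simp [pvAget, pvAset, Array.getD_eq_getD_getElem?, Array.getElem?_setIfInBounds, h]

theorem pvAget_pvAset_ne {a : Array Int} {i k : Nat} {v : Int} (h : k ≠ i) :
    pvAget (pvAset a i v) k = pvAget a k := by
  simp [pvAget, pvAset, Array.getD_eq_getD_getElem?, Array.getElem?_setIfInBounds, Ne.symm h]

theorem size_pvAset (a : Array Int) (i : Nat) (v : Int) : (pvAset a i v).size = a.size := by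
  simp [pvAset]

theorem pvAget_replicate (m i : Nat) : pvAget (Array.replicate m (0 : Int)) i = 0 := by
  simp only [pvAget, Array.getD_eq_getD_getElem?, Array.getElem?_replicate]
  by_cases h : i < m <;> simp [h]

theorem lt_two_pow_of_bits {mask n : Nat} (h : ∀ k, mask.testBit k = true → k < n) :
    mask < 2 ^ n := by
  by_contra hc
  push_neg at hc
  have hne : mask ≠ 0 := by
    have := Nat.one_le_two_pow (n := n); omega
  obtain ⟨i, hi, hmax⟩ := Nat.exists_most_significant_bit hne
  have hin : i < n := h i hi
  have hlt : mask < 2 ^ (i + 1) := by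
    refine Nat.lt_of_testBit (i + 1) (hmax _ (by omega)) ?_ ?_
    · exact Nat.testBit_two_pow_self
    · intro j hj
      rw [hmax _ (by omega), Nat.testBit_two_pow_of_ne (by omega)]
  have : 2 ^ (i + 1) ≤ 2 ^ n := Nat.pow_le_pow_right (by omega) (by omega)
  omega

theorem bits_lt_of_lt_two_pow {mask n k : Nat} (h : mask < 2 ^ n)
    (hk : mask.testBit k = true) : k < n := by
  have h1 := testBit_two_pow_le hk
  by_contra hc
  have : 2 ^ n ≤ 2 ^ k := Nat.pow_le_pow_right (by omega) (by omega)
  omega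

theorem and_pow_eq_zero_iff (mask i : Nat) :
    (mask &&& (1 <<< i) = 0) ↔ mask.testBit i = false := by
  rw [Nat.one_shiftLeft, Nat.and_two_pow]
  cases h : mask.testBit i <;> simp [h]

theorem two_pow_add_testBit {i c : Nat} (h : c < 2 ^ i) : (2 ^ i + c).testBit i = true := by
  rw [Nat.testBit_two_pow_add_eq, Nat.testBit_lt_two_pow h]
  rfl

theorem two_pow_add_xor {i c : Nat} (h : c < 2 ^ i) : (2 ^ i + c) ^^^ 2 ^ i = c := by
  apply Nat.eq_of_testBit_eq
  intro k
  rw [Nat.testBit_xor]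
  rcases lt_trichotomy k i with hk | hk | hk
  · rw [Nat.testBit_two_pow_add_gt hk, Nat.testBit_two_pow_of_ne (by omega)]
    simp
  · subst hk
    rw [Nat.testBit_two_pow_add_eq, Nat.testBit_two_pow_self, Nat.testBit_lt_two_pow h]
    rfl
  · have h2 : 2 ^ (i + 1) ≤ 2 ^ k := Nat.pow_le_pow_right (by omega) (by omega)
    have h3 : 2 ^ (i + 1) = 2 * 2 ^ i := by ring
    rw [Nat.testBit_lt_two_pow (by omega), Nat.testBit_two_pow_of_ne (by omega),
      Nat.testBit_lt_two_pow (by omega)]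
    rfl

theorem pvFactTab_getD {n k : Nat} (hk : k ≤ n) : (pvFactTab n).getD k 0 = fac k := by
  suffices h : ∀ m, m ≤ n → ∀ k ≤ n,
      ((List.range' 1 m).foldl (fun f k => f.set k (f.getD (k - 1) 0 * (k : Int)))
        (List.replicate (n + 1) (1 : Int))).getD k 0 = if k ≤ m then fac k else 1 by
    have := h n (le_refl n) k hk
    rw [if_pos hk] at this
    exact this
  intro m
  induction m with
  | zero =>
      intro _ k hk2
      simp only [List.range'_zero, List.foldl_nil]
      rw [List.getD_eq_getElem _ _ (by simp; omega), List.getElem_replicate]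
      by_cases h0 : k ≤ 0
      · have : k = 0 := by omega
        subst this
        rw [if_pos (le_refl 0)]
        simp [fac, Nat.factorial]
      · rw [if_neg h0]
  | succ m ih =>
      intro hm k hk2
      have hfl : ∀ (l : List Nat) (f0 : List Int),
          (l.foldl (fun f k => f.set k (f.getD (k - 1) 0 * (k : Int))) f0).length = f0.length := by
        intro l
        induction l with
        | nil => intro f0; rfl
        | cons a l ih2 => intro f0; rw [List.foldl_cons, ih2, List.length_set]
      have hrange : List.range' 1 (m + 1) = List.range' 1 m ++ [1 + m] := by
        have := List.range'_concat (step := 1) (s := 1) (n := m)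
        simpa using this
      rw [hrange, List.foldl_append, List.foldl_cons, List.foldl_nil]
      have hlen : ((List.range' 1 m).foldl (fun f k => f.set k (f.getD (k - 1) 0 * (k : Int)))
          (List.replicate (n + 1) (1 : Int))).length = n + 1 := by
        rw [hfl]; simp
      have hget : ((List.range' 1 m).foldl (fun f k => f.set k (f.getD (k - 1) 0 * (k : Int)))
          (List.replicate (n + 1) (1 : Int))).getD (1 + m - 1) 0 = fac m := by
        have := ih (by omega) m (by omega)
        rw [if_pos (le_refl m)] at this
        simpa using this
      rw [hget]
      by_cases hkm : k = m + 1
      · subst hkm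
        rw [show 1 + m = m + 1 by omega, getD_set_self' (by rw [hlen]; omega), if_pos (le_refl _)]
        unfold fac
        rw [show m + 1 = Nat.succ m from rfl, Nat.factorial_succ]
        push_cast
        ring
      · rw [getD_set_ne' (by omega), ih (by omega) k hk2]
        by_cases hc : k ≤ m
        · rw [if_pos hc, if_pos (by omega)]
        · rw [if_neg hc, if_neg (by omega)]

theorem pvTabCell_fst (w : List Int) (i : Nat) (st : Array Int × Array Int) (mask : Nat) :
    (pvTabCell w i st mask).1 =
      pvAset st.1 mask (pvAget st.1 (mask ^^^ (1 <<< i)) + w.getD i 0) := rfl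

theorem pvTabCell_snd (w : List Int) (i : Nat) (st : Array Int × Array Int) (mask : Nat) :
    (pvTabCell w i st mask).2 =
      pvAset st.2 mask (pvAget st.2 (mask ^^^ (1 <<< i)) + 1) := rfl

theorem pvTables_spec (w : List Int) (n : Nat) :
    (pvTables w n).1.size = 1 <<< n ∧ (pvTables w n).2.size = 1 <<< n ∧
    ∀ mask, mask < 1 <<< n →
      pvAget (pvTables w n).1 mask = totalw w mask ∧
      pvAget (pvTables w n).2 mask = (pcs mask : Int) := by
  unfold pvTables
  rw [Nat.one_shiftLeft]
  suffices h : ∀ m, m ≤ n →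
      ((List.range m).foldl (pvTabStep w)
          (Array.replicate (2 ^ n) 0, Array.replicate (2 ^ n) 0)).1.size = 2 ^ n ∧
      ((List.range m).foldl (pvTabStep w)
          (Array.replicate (2 ^ n) 0, Array.replicate (2 ^ n) 0)).2.size = 2 ^ n ∧
      (∀ mask, mask < 2 ^ m →
        pvAget ((List.range m).foldl (pvTabStep w)
            (Array.replicate (2 ^ n) 0, Array.replicate (2 ^ n) 0)).1 mask = totalw w mask ∧
        pvAget ((List.range m).foldl (pvTabStep w)
            (Array.replicate (2 ^ n) 0, Array.replicate (2 ^ n) 0)).2 mask = (pcs mask : Int)) ∧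
      (∀ mask, 2 ^ m ≤ mask →
        pvAget ((List.range m).foldl (pvTabStep w)
            (Array.replicate (2 ^ n) 0, Array.replicate (2 ^ n) 0)).1 mask = 0 ∧
        pvAget ((List.range m).foldl (pvTabStep w)
            (Array.replicate (2 ^ n) 0, Array.replicate (2 ^ n) 0)).2 mask = 0) by
    obtain ⟨h1, h2, h3, _⟩ := h n (le_refl n)
    exact ⟨h1, h2, fun mask hmask => h3 mask hmask⟩
  intro m
  induction m with
  | zero =>
      intro _
      refine ⟨by simp, by simp, ?_, ?_⟩
      · intro mask hmask
        have h0 : mask = 0 := by omega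
        subst h0
        unfold pvAget
        simp only [List.range_zero, List.foldl_nil]
        rw [totalw_zero, pcs_zero]
        constructor <;>
          · rw [Array.getD_eq_getD_getElem?, Array.getElem?_replicate]
            by_cases h : (0 : Nat) < 2 ^ n <;> simp [h]
      · intro mask _
        unfold pvAget
        simp only [List.range_zero, List.foldl_nil]
        constructor <;>
          · rw [Array.getD_eq_getD_getElem?, Array.getElem?_replicate]
            by_cases h : mask < 2 ^ n <;> simp [h]
  | succ m ih =>
      intro hm
      obtain ⟨ih1, ih2, ih3, ih4⟩ := ih (by omega)
      rw [List.range_succ, List.foldl_append, List.foldl_cons, List.foldl_nil]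
      unfold pvTabStep
      rw [Nat.one_shiftLeft]
      suffices hinner : ∀ c, c ≤ 2 ^ m →
          (((List.range' (2 ^ m) c).foldl (pvTabCell w m)
              ((List.range m).foldl (pvTabStep w)
                (Array.replicate (2 ^ n) 0, Array.replicate (2 ^ n) 0))).1.size = 2 ^ n) ∧
          (((List.range' (2 ^ m) c).foldl (pvTabCell w m)
              ((List.range m).foldl (pvTabStep w)
                (Array.replicate (2 ^ n) 0, Array.replicate (2 ^ n) 0))).2.size = 2 ^ n) ∧
          (∀ mask, mask < 2 ^ m + c →
            pvAget ((List.range' (2 ^ m) c).foldl (pvTabCell w m)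
                ((List.range m).foldl (pvTabStep w)
                  (Array.replicate (2 ^ n) 0, Array.replicate (2 ^ n) 0))).1 mask = totalw w mask ∧
            pvAget ((List.range' (2 ^ m) c).foldl (pvTabCell w m)
                ((List.range m).foldl (pvTabStep w)
                  (Array.replicate (2 ^ n) 0, Array.replicate (2 ^ n) 0))).2 mask = (pcs mask : Int)) ∧
          (∀ mask, 2 ^ m + c ≤ mask →
            pvAget ((List.range' (2 ^ m) c).foldl (pvTabCell w m)
                ((List.range m).foldl (pvTabStep w)
                  (Array.replicate (2 ^ n) 0, Array.replicate (2 ^ n) 0))).1 mask = 0 ∧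
            pvAget ((List.range' (2 ^ m) c).foldl (pvTabCell w m)
                ((List.range m).foldl (pvTabStep w)
                  (Array.replicate (2 ^ n) 0, Array.replicate (2 ^ n) 0))).2 mask = 0) by
        obtain ⟨g1, g2, g3, g4⟩ := hinner (2 ^ m) (le_refl _)
        refine ⟨g1, g2, ?_, ?_⟩
        · intro mask hmask
          refine g3 mask ?_
          have : 2 ^ (m + 1) = 2 ^ m + 2 ^ m := by ring
          omega
        · intro mask hmask
          refine g4 mask ?_
          have : 2 ^ (m + 1) = 2 ^ m + 2 ^ m := by ring
          omega
      intro c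
      induction c with
      | zero =>
          intro _
          simp only [List.range'_zero, List.foldl_nil, Nat.add_zero]
          exact ⟨ih1, ih2, fun mask hmask => ih3 mask hmask, fun mask hmask => ih4 mask hmask⟩
      | succ c ihc =>
          intro hc
          obtain ⟨g1, g2, g3, g4⟩ := ihc (by omega)
          have hrange : List.range' (2 ^ m) (c + 1) = List.range' (2 ^ m) c ++ [2 ^ m + c] := by
            have := List.range'_concat (step := 1) (s := 2 ^ m) (n := c)
            simpa using this
          rw [hrange, List.foldl_append, List.foldl_cons, List.foldl_nil]
          simp only [pvTabCell_fst, pvTabCell_snd]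
          have hcc : c < 2 ^ m := by omega
          have hxor : (2 ^ m + c) ^^^ (1 <<< m) = c := by
            rw [Nat.one_shiftLeft]; exact two_pow_add_xor hcc
          have htb : (2 ^ m + c).testBit m = true := two_pow_add_testBit hcc
          have hread := g3 c (by omega)
          have hlt2n : 2 ^ m + c < 2 ^ n := by
            have h1 : 2 ^ (m + 1) ≤ 2 ^ n := Nat.pow_le_pow_right (by omega) (by omega)
            have h2 : 2 ^ (m + 1) = 2 ^ m + 2 ^ m := by ring
            omega
          have htot : totalw w c + w.getD m 0 = totalw w (2 ^ m + c) := by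
            have := totalw_xor w (s := 2 ^ m + c) (i := m) htb
            rw [hxor] at this
            unfold wiv at this
            omega
          have hpc : (pcs c : Int) + 1 = (pcs (2 ^ m + c) : Int) := by
            obtain ⟨hp1, hp2⟩ := pcs_xor (s := 2 ^ m + c) (i := m) htb
            rw [hxor] at hp1
            have hp3 : 1 ≤ pcs (2 ^ m + c) := by
              unfold pcs
              refine Finset.card_pos.mpr ⟨m, mem_bitsFin.mpr htb⟩
            push_cast
            omega
          refine ⟨by rw [size_pvAset]; exact g1, by rw [size_pvAset]; exact g2, ?_, ?_⟩
          · intro mask hmask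
            by_cases he : mask = 2 ^ m + c
            · subst he
              rw [hxor]
              constructor
              · rw [pvAget_pvAset_self (by rw [g1]; exact hlt2n), hread.1, htot]
              · rw [pvAget_pvAset_self (by rw [g2]; exact hlt2n), hread.2, hpc]
            · rw [hxor]
              constructor
              · rw [pvAget_pvAset_ne he]
                exact (g3 mask (by omega)).1
              · rw [pvAget_pvAset_ne he]
                exact (g3 mask (by omega)).2
          · intro mask hmask
            rw [hxor]
            constructor
            · rw [pvAget_pvAset_ne (by omega)]
              exact (g4 mask (by omega)).1
            · rw [pvAget_pvAset_ne (by omega)]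
              exact (g4 mask (by omega)).2

theorem bitsFin_eq_range_filter {mask n : Nat} (h : mask < 2 ^ n) :
    bitsFin mask = (Finset.range n).filter (fun j => mask.testBit j) := by
  ext k
  simp only [mem_bitsFin, Finset.mem_filter, Finset.mem_range]
  constructor
  · intro hk
    exact ⟨bits_lt_of_lt_two_pow h hk, hk⟩
  · exact fun hk => hk.2

theorem pvAcc_spec (od : Array Int) (n mask : Nat) :
    pvAcc od n mask =
      ∑ j ∈ (Finset.range n).filter (fun j => mask.testBit j),
        pvAget od (mask ^^^ (1 <<< j)) := by
  unfold pvAcc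
  suffices h : ∀ m (a : Int),
      (List.range m).foldl (fun acc j =>
        if mask &&& (1 <<< j) ≠ 0 then acc + pvAget od (mask ^^^ (1 <<< j)) else acc) a =
      a + ∑ j ∈ (Finset.range m).filter (fun j => mask.testBit j),
        pvAget od (mask ^^^ (1 <<< j)) by
    rw [h n 0, zero_add]
  intro m
  induction m with
  | zero => intro a; simp
  | succ m ih =>
      intro a
      rw [List.range_succ, List.foldl_append, List.foldl_cons, List.foldl_nil, ih,
        Finset.range_add_one, Finset.filter_insert]
      by_cases hb : mask.testBit m
      · rw [if_pos hb, if_pos (by simp [ne_eq, and_pow_eq_zero_iff, hb]),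
          Finset.sum_insert (by simp)]
        ring
      · rw [if_neg hb, if_neg (by simp [ne_eq, and_pow_eq_zero_iff, hb])]

theorem pvOrders_spec (w : List Int) (quota : Int) (n : Nat) (total : Array Int)
    (htot : ∀ mask, mask < 1 <<< n → pvAget total mask = totalw w mask) :
    ∀ mask, mask < 1 <<< n → pvAget (pvOrders quota n total) mask = Nspec w quota mask := by
  unfold pvOrders
  rw [Nat.one_shiftLeft] at htot ⊢
  suffices h : ∀ c, c ≤ 2 ^ n - 1 →
      (∀ mask, mask ≤ c →
        pvAget ((List.range' 1 c).foldl (pvOrdStep quota n total)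
          (pvAset (Array.replicate (2 ^ n) 0) 0 (if 0 < quota then 1 else 0))) mask
          = Nspec w quota mask) ∧
      (∀ mask, c < mask →
        pvAget ((List.range' 1 c).foldl (pvOrdStep quota n total)
          (pvAset (Array.replicate (2 ^ n) 0) 0 (if 0 < quota then 1 else 0))) mask = 0) ∧
      ((List.range' 1 c).foldl (pvOrdStep quota n total)
          (pvAset (Array.replicate (2 ^ n) 0) 0 (if 0 < quota then 1 else 0))).size = 2 ^ n by
    intro mask hmask
    exact (h (2 ^ n - 1) (le_refl _)).1 mask (by omega)
  intro c
  induction c with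
  | zero =>
      refine fun _ => ⟨?_, ?_, ?_⟩
      · intro mask hmask
        have h0 : mask = 0 := by omega
        subst h0
        rw [Nspec_zero]
        simp only [List.range'_zero, List.foldl_nil]
        rw [pvAget_pvAset_self (by simp [Nat.one_le_two_pow])]
      · intro mask hmask
        simp only [List.range'_zero, List.foldl_nil]
        rw [pvAget_pvAset_ne (by omega), pvAget_replicate]
      · simp [size_pvAset]
  | succ c ihc =>
      intro hc
      obtain ⟨g1, g2, g3⟩ := ihc (by omega)
      have hrange : List.range' 1 (c + 1) = List.range' 1 c ++ [1 + c] := by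
        have := List.range'_concat (step := 1) (s := 1) (n := c)
        simpa using this
      rw [hrange, List.foldl_append, List.foldl_cons, List.foldl_nil]
      have hmlt : 1 + c < 2 ^ n := by omega
      have hmne : (1 + c : Nat) ≠ 0 := by omega
      have hval : pvOrdStep quota n total
          ((List.range' 1 c).foldl (pvOrdStep quota n total)
            (pvAset (Array.replicate (2 ^ n) 0) 0 (if 0 < quota then 1 else 0))) (1 + c) =
          pvAset ((List.range' 1 c).foldl (pvOrdStep quota n total)
            (pvAset (Array.replicate (2 ^ n) 0) 0 (if 0 < quota then 1 else 0))) (1 + c)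
            (Nspec w quota (1 + c)) ∨
          (pvOrdStep quota n total
            ((List.range' 1 c).foldl (pvOrdStep quota n total)
              (pvAset (Array.replicate (2 ^ n) 0) 0 (if 0 < quota then 1 else 0))) (1 + c) =
            (List.range' 1 c).foldl (pvOrdStep quota n total)
              (pvAset (Array.replicate (2 ^ n) 0) 0 (if 0 < quota then 1 else 0))
            ∧ Nspec w quota (1 + c) = 0) := by
        unfold pvOrdStep
        by_cases hguard : pvAget total (1 + c) < quota
        · left
          rw [if_pos hguard]
          congr 1
          have htw : totalw w (1 + c) < quota := by rw [← htot (1 + c) hmlt]; exact hguard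
          rw [pvAcc_spec, Nspec_eq w quota hmne, ← bitsFin_eq_range_filter hmlt, if_pos htw]
          refine Finset.sum_congr rfl fun jj hjj => ?_
          have hlt : (1 + c) ^^^ (1 <<< jj) < 1 + c := xor_two_pow_lt (mem_bitsFin.mp hjj)
          exact g1 _ (by omega)
        · right
          have htw : ¬ totalw w (1 + c) < quota := by rw [← htot (1 + c) hmlt]; exact hguard
          rw [if_neg hguard, Nspec_eq w quota hmne, if_neg htw]
          exact ⟨rfl, rfl⟩
      rcases hval with hval | ⟨hval, hz⟩
      · rw [hval]
        refine ⟨?_, ?_, by rw [size_pvAset]; exact g3⟩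
        · intro mask hmask
          by_cases he : mask = 1 + c
          · subst he
            rw [pvAget_pvAset_self (by rw [g3]; exact hmlt)]
          · rw [pvAget_pvAset_ne he]
            exact g1 mask (by omega)
        · intro mask hmask
          rw [pvAget_pvAset_ne (by omega)]
          exact g2 mask (by omega)
      · rw [hval]
        refine ⟨?_, fun mask hmask => g2 mask (by omega), g3⟩
        intro mask hmask
        by_cases he : mask = 1 + c
        · subst he
          rw [hz]
          exact g2 _ (by omega)
        · exact g1 mask (by omega)

-- ---------- Part VI: the final accumulation and the glue ----------

/-- the amount the final loop adds at index `i` while scanning `mask`. -/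
def pvFinTerm (w : List Int) (quota : Int) (n : Nat) (fact : List Int)
    (tp : Array Int × Array Int) (orders : Array Int) (i mask : Nat) : Int :=
  if mask &&& (1 <<< i) = 0 then
    (if pvAget orders mask ≠ 0 ∧ pvAget tp.1 mask + w.getD i 0 ≥ quota then
      pvAget orders mask * PySem.List.pyGetD fact ((n : Int) - 1 - pvAget tp.2 mask) 0
    else 0)
  else 0

theorem pvFinCell_fold (w : List Int) (quota : Int) (n : Nat) (fact : List Int)
    (tp : Array Int × Array Int) (orders : Array Int) (i : Nat) :
    ∀ (L : List Nat) (pw : List Int), i < pw.length →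
      ((L.foldl (pvFinCell w quota n fact tp orders i) pw).length = pw.length) ∧
      (∀ k, k ≠ i → (L.foldl (pvFinCell w quota n fact tp orders i) pw).getD k 0 = pw.getD k 0) ∧
      ((L.foldl (pvFinCell w quota n fact tp orders i) pw).getD i 0 =
        pw.getD i 0 + (L.map (pvFinTerm w quota n fact tp orders i)).sum) := by
  intro L
  induction L with
  | nil => intro pw _; exact ⟨rfl, fun _ _ => rfl, by simp⟩
  | cons mask L ih =>
      intro pw hi
      rw [List.foldl_cons]
      have hcell : (pvFinCell w quota n fact tp orders i pw mask).length = pw.length ∧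
          (∀ k, k ≠ i → (pvFinCell w quota n fact tp orders i pw mask).getD k 0 = pw.getD k 0) ∧
          ((pvFinCell w quota n fact tp orders i pw mask).getD i 0 =
            pw.getD i 0 + pvFinTerm w quota n fact tp orders i mask) := by
        unfold pvFinCell pvFinTerm
        by_cases h1 : mask &&& (1 <<< i) = 0
        · rw [if_pos h1, if_pos h1]
          by_cases h2 : pvAget orders mask ≠ 0 ∧ pvAget tp.1 mask + w.getD i 0 ≥ quota
          · rw [if_pos h2, if_pos h2]
            refine ⟨by rw [List.length_set], fun k hk => getD_set_ne' (Ne.symm hk), ?_⟩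
            rw [getD_set_self' hi]
          · rw [if_neg h2, if_neg h2]
            exact ⟨rfl, fun _ _ => rfl, by omega⟩
        · rw [if_neg h1, if_neg h1]
          exact ⟨rfl, fun _ _ => rfl, by omega⟩
      obtain ⟨hc1, hc2, hc3⟩ := hcell
      obtain ⟨hl1, hl2, hl3⟩ := ih (pvFinCell w quota n fact tp orders i pw mask)
        (by rw [hc1]; exact hi)
      refine ⟨by rw [hl1, hc1], fun k hk => by rw [hl2 k hk, hc2 k hk], ?_⟩
      rw [hl3, hc3, List.map_cons, List.sum_cons]
      ring

theorem pvFin_fold (w : List Int) (quota : Int) (n : Nat) (fact : List Int)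
    (tp : Array Int × Array Int) (orders : Array Int) (j : Nat) :
    ∀ (L : List Nat) (pw : List Int), (∀ x ∈ L, x < pw.length) → j < pw.length →
      ((L.foldl (pvFinStep w quota n fact tp orders) pw).length = pw.length) ∧
      ((L.foldl (pvFinStep w quota n fact tp orders) pw).getD j 0 =
        pw.getD j 0 + (L.map (fun i => if i = j then
          ((List.range (1 <<< n)).map (pvFinTerm w quota n fact tp orders i)).sum else 0)).sum) := by
  intro L
  induction L with
  | nil => intro pw _ _; exact ⟨rfl, by simp⟩
  | cons i L ih =>
      intro pw hmem hj
      rw [List.foldl_cons]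
      have hi : i < pw.length := hmem i (by simp)
      obtain ⟨hc1, hc2, hc3⟩ := pvFinCell_fold w quota n fact tp orders i
        (List.range (1 <<< n)) pw hi
      have hstep1 : (pvFinStep w quota n fact tp orders pw i).length = pw.length := hc1
      obtain ⟨hl1, hl2⟩ := ih (pvFinStep w quota n fact tp orders pw i)
        (fun x hx => by rw [hstep1]; exact hmem x (by simp [hx]))
        (by rw [hstep1]; exact hj)
      refine ⟨by rw [hl1, hstep1], ?_⟩
      rw [hl2, List.map_cons, List.sum_cons]
      by_cases hij : i = j
      · subst hij
        rw [if_pos rfl]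
        unfold pvFinStep at *
        rw [hc3]
        ring
      · rw [if_neg hij]
        unfold pvFinStep at *
        rw [hc2 j (fun he => hij he.symm)]
        ring

theorem subsF_full_minus (n j : Nat) (hj : j < n) :
    subsF (maskOf ((List.range n).erase j)) =
      (Finset.range (1 <<< n)).filter (fun mask => mask &&& (1 <<< j) = 0) := by
  have hmem : ∀ k, (maskOf ((List.range n).erase j)).testBit k = true ↔ (k ≠ j ∧ k < n) := by
    intro k
    rw [maskOf_testBit]
    simp [List.Nodup.mem_erase_iff (List.nodup_range)]
  ext mask
  rw [mem_subsF, Finset.mem_filter, Finset.mem_range, and_pow_eq_zero_iff, Nat.one_shiftLeft]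
  constructor
  · intro h
    refine ⟨lt_two_pow_of_bits fun k hk => ((hmem k).mp (h k hk)).2, ?_⟩
    by_contra hc
    have h2 := h j (by revert hc; cases mask.testBit j <;> simp)
    exact ((hmem j).mp h2).1 rfl
  · rintro ⟨h1, h2⟩ k hk
    refine (hmem k).mpr ⟨?_, bits_lt_of_lt_two_pow h1 hk⟩
    intro he
    rw [he, h2] at hk
    cases hk

theorem final_term_sum (w : List Int) (quota : Int) (n j : Nat) (hj : j < n) :
    ((List.range (1 <<< n)).map (pvFinTerm w quota n (pvFactTab n) (pvTables w n)
      (pvOrders quota n (pvTables w n).1) j)).sum =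
    pvCon w quota (maskOf ((List.range n).erase j)) j n := by
  obtain ⟨ht1, ht2, ht3⟩ := pvTables_spec w n
  have hord := pvOrders_spec w quota n (pvTables w n).1
    (fun mask hmask => (ht3 mask hmask).1)
  rw [sum_map_nodup _ _ (List.nodup_range), List.toFinset_range]
  unfold pvCon
  rw [subsF_full_minus n j hj, Finset.sum_filter]
  refine Finset.sum_congr rfl fun mask hmask => ?_
  rw [Finset.mem_range] at hmask
  unfold pvFinTerm
  by_cases h1 : mask &&& (1 <<< j) = 0
  · rw [if_pos h1, if_pos h1]
    rw [hord mask hmask, (ht3 mask hmask).1, (ht3 mask hmask).2]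
    have hpcs : pcs mask ≤ n - 1 := by
      have hsub : bitsFin mask ⊆ (Finset.range n).erase j := by
        intro k hk
        have hk2 := mem_bitsFin.mp hk
        refine Finset.mem_erase.mpr ⟨?_, Finset.mem_range.mpr
          (bits_lt_of_lt_two_pow (by rwa [Nat.one_shiftLeft] at hmask) hk2)⟩
        intro he
        rw [he] at hk2
        rw [and_pow_eq_zero_iff] at h1
        rw [h1] at hk2
        cases hk2
      have := Finset.card_le_card hsub
      rw [Finset.card_erase_of_mem (Finset.mem_range.mpr hj), Finset.card_range] at this
      exact this
    have hfact : PySem.List.pyGetD (pvFactTab n) ((n : Int) - 1 - (pcs mask : Int)) 0 =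
        fac (n - 1 - pcs mask) := by
      rw [show (n : Int) - 1 - (pcs mask : Int) = ((n - 1 - pcs mask : Nat) : Int) by
        push_cast; omega]
      rw [PySem.List.pyGetD_natCast]
      exact pvFactTab_getD (by omega)
    rw [hfact]
    unfold wiv
    by_cases h2 : Nspec w quota mask = 0
    · simp [h2]
    · by_cases h3 : quota ≤ totalw w mask + w.getD j 0
      · rw [if_pos ⟨h2, by omega⟩, if_pos h3]
      · rw [if_neg (fun hc => h3 (by omega)), if_neg h3, mul_zero]
  · rw [if_neg h1, if_neg h1]

-- ---------- Part VII: the initial circular list and the main glue ----------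

theorem init_len (n : Nat) (f : Int → Int) :
    ((PySem.List.pyRange 0 ((n : Int) + 1) 1).map f).length = n + 1 := by
  rw [List.length_map, PySem.List.length_pyRange_one]
  omega

theorem init_getD (n : Nat) (f : Int → Int) (k : Nat) (hk : k < n + 1) :
    (((PySem.List.pyRange 0 ((n : Int) + 1) 1).map f).getD k 0) = f (k : Int) := by
  rw [← PySem.List.pyGetD_natCast]
  rw [show ((n : Int) + 1) = ((n + 1 : Nat) : Int) by push_cast; ring]
  rw [PySem.List.pyGetD_map_pyRange f (n + 1) k 0 hk]

theorem EncInit (n : Nat) :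
    Enc n (List.range n)
      ((PySem.List.pyRange 0 ((n : Int) + 1) 1).map (fun i => if i > 0 then i - 1 else (n : Int)))
      ((PySem.List.pyRange 0 ((n : Int) + 1) 1).map (fun i => if i < (n : Int) then i + 1 else 0)) := by
  have hrn : ∀ k : Nat, k < n + 1 →
      ((PySem.List.pyRange 0 ((n : Int) + 1) 1).map
        (fun i => if i < (n : Int) then i + 1 else 0)).getD k 0
      = if (k : Int) < (n : Int) then (k : Int) + 1 else 0 := fun k hk => init_getD n _ k hk
  have hln : ∀ k : Nat, k < n + 1 →
      ((PySem.List.pyRange 0 ((n : Int) + 1) 1).map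
        (fun i => if i > 0 then i - 1 else (n : Int))).getD k 0
      = if (k : Int) > 0 then (k : Int) - 1 else (n : Int) := fun k hk => init_getD n _ k hk
  refine ⟨init_len n _, init_len n _, List.nodup_range, fun x hx => List.mem_range.mp hx, ?_, ?_⟩
  · -- right chain: n → 0 → 1 → … → n-1 → n
    have chain : ∀ c a, a + c + 1 = n →
        LinkedTo ((PySem.List.pyRange 0 ((n : Int) + 1) 1).map
          (fun i => if i < (n : Int) then i + 1 else 0)) a (List.range' (a + 1) c) n := by
      intro c
      induction c with
      | zero =>
          intro a ha
          show _ = _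
          rw [hrn a (by omega), if_pos (by push_cast; omega)]
          push_cast; omega
      | succ c ih =>
          intro a ha
          rw [List.range'_succ]
          refine ⟨?_, ih (a + 1) (by omega)⟩
          rw [hrn a (by omega), if_pos (by push_cast; omega)]
          push_cast; omega
    cases n with
    | zero =>
        show _ = _
        rw [hrn 0 (by omega)]
        simp
    | succ m =>
        rw [List.range_eq_range', List.range'_succ]
        refine ⟨?_, chain m 0 (by omega)⟩
        rw [hrn (m + 1) (by omega), if_neg (by push_cast; omega)]
        simp
  · -- left chain: n → n-1 → … → 0 → n
    have chain : ∀ a, a ≤ n →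
        LinkedTo ((PySem.List.pyRange 0 ((n : Int) + 1) 1).map
          (fun i => if i > 0 then i - 1 else (n : Int))) a (List.range a).reverse n := by
      intro a
      induction a with
      | zero =>
          intro _
          show _ = _
          rw [hln 0 (by omega), if_neg (by norm_num)]
      | succ a ih =>
          intro ha
          rw [List.range_succ, List.reverse_append]
          refine ⟨?_, ih (by omega)⟩
          rw [hln (a + 1) (by omega), if_pos (by push_cast; omega)]
          push_cast; omega
    cases n with
    | zero =>
        show _ = _
        rw [hln 0 (by omega), if_neg (by norm_num)]
    | succ m =>
        rw [List.range_succ, List.reverse_append]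
        refine ⟨?_, chain m (by omega)⟩
        rw [hln (m + 1) (by omega), if_pos (by push_cast; omega)]
        push_cast; omega

theorem power0_eq (n : Nat) :
    ((PySem.List.pyRange 0 (n : Int) 1).map (fun _ => (0 : Int))) = List.replicate n 0 := by
  have h1 : ∀ b ∈ ((PySem.List.pyRange 0 (n : Int) 1).map (fun _ => (0 : Int))), b = 0 := by
    simp
  have h2 := List.eq_replicate_of_mem h1
  simpa using h2

theorem alt_getD (w : List Int) (q : Int) (j : Nat) (hj : j < w.length) :
    (shapley_shubik_alt w q).getD j 0 =
      pvCon w q (maskOf ((List.range w.length).erase j)) j w.length := by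
  unfold shapley_shubik_alt
  obtain ⟨_, hgd⟩ := pvFin_fold w q w.length (pvFactTab w.length) (pvTables w w.length)
    (pvOrders q w.length (pvTables w w.length).1) j (List.range w.length)
    (List.replicate w.length 0)
    (fun x hx => by rw [List.length_replicate]; exact List.mem_range.mp hx)
    (by rw [List.length_replicate]; exact hj)
  rw [hgd, sum_map_nodup _ _ (List.nodup_range), List.toFinset_range,
    Finset.sum_ite_eq' (Finset.range w.length) j, if_pos (Finset.mem_range.mpr hj),
    final_term_sum w q w.length j hj]
  rw [List.getD_eq_getElem _ _ (by rw [List.length_replicate]; exact hj),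
    List.getElem_replicate, zero_add]

theorem alt_length (w : List Int) (q : Int) :
    (shapley_shubik_alt w q).length = w.length := by
  unfold shapley_shubik_alt
  have : ∀ (L : List Nat) (pw : List Int), (∀ x ∈ L, x < pw.length) →
      (L.foldl (pvFinStep w q w.length (pvFactTab w.length) (pvTables w w.length)
        (pvOrders q w.length (pvTables w w.length).1)) pw).length = pw.length := by
    intro L
    induction L with
    | nil => intro pw _; rfl
    | cons i L ih =>
        intro pw hb
        rw [List.foldl_cons]
        have hi : i < pw.length := hb i (by simp)
        have hs : (pvFinStep w q w.length (pvFactTab w.length) (pvTables w w.length)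
            (pvOrders q w.length (pvTables w w.length).1) pw i).length = pw.length :=
          (pvFinCell_fold w q w.length _ _ _ i (List.range (1 <<< w.length)) pw hi).1
        rw [ih _ (fun x hx => by rw [hs]; exact hb x (by simp [hx])), hs]
  rw [this (List.range w.length) (List.replicate w.length 0)
    (fun x hx => by rw [List.length_replicate]; exact List.mem_range.mp hx),
    List.length_replicate]

-- ===== VERDICT (by name: the statement is the Claim_ definition above) =====
theorem shapley_shubik_spec : Claim_equal_shapley_shubik := by
  intro w q hdom hpre
  unfold Spec_shapley_shubik
  unfold Pre_shapley_shubik at hpre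
  unfold shapley_shubik
  have hsim := sim_rec w w.length rfl (w.length + 1) (List.range w.length)
    ((PySem.List.pyRange 0 ((w.length : Int) + 1) 1).map
      (fun i => if i > 0 then i - 1 else (w.length : Int)))
    ((PySem.List.pyRange 0 ((w.length : Int) + 1) 1).map
      (fun i => if i < (w.length : Int) then i + 1 else 0))
    ((PySem.List.pyRange 0 (w.length : Int) 1).map (fun _ => (0 : Int)))
    q (-1) (EncInit w.length)
  rw [List.length_range] at hsim
  show (pvRec w w.length q ((w.length : Nat) : Int) (-1)
    ((PySem.List.pyRange 0 ((w.length : Int) + 1) 1).map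
      (fun i => if i > 0 then i - 1 else (w.length : Int)))
    ((PySem.List.pyRange 0 ((w.length : Int) + 1) 1).map
      (fun i => if i < (w.length : Int) then i + 1 else 0))
    ((PySem.List.pyRange 0 (w.length : Int) 1).map (fun _ => (0 : Int)))
    (w.length + 1)).2.2 = _
  rw [hsim, power0_eq]
  show recL w q (List.range w.length) (-1) (List.replicate w.length 0) (w.length + 1)
      = shapley_shubik_alt w q
  have hlenA : (recL w q (List.range w.length) (-1) (List.replicate w.length 0)
      (w.length + 1)).length = w.length := by
    rw [(recLGo_length w (w.length + 1)).1, List.length_replicate]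
  refine List.ext_getElem (by rw [hlenA, alt_length]) ?_
  intro j h1 h2
  rw [← List.getD_eq_getElem _ 0 h1, ← List.getD_eq_getElem _ 0 h2]
  have hjn : j < w.length := by rwa [hlenA] at h1
  have hA := recL_getD w (List.range w.length).length (List.range w.length) rfl q (-1)
    (List.replicate w.length 0) (w.length + 1) j (List.nodup_range)
    (fun x hx => by rw [List.length_replicate]; exact List.mem_range.mp hx)
    (by rw [List.length_range])
    (by rwa [List.length_replicate])
    (fun h => absurd h (by omega))
  rw [hA, if_neg (by omega), if_pos (List.mem_range.mpr hjn), List.length_range,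
    List.getD_eq_getElem _ _ (by rwa [List.length_replicate]), List.getElem_replicate,
    zero_add, alt_getD w q j hjn]
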